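-- pv_equiv track=rewrite | github.com/duckduckdoof/NSA | extended_transformations/utils.py | find_connected_all_directions_by_color
-- ===== SOURCE A (Python) =====
-- from collections import deque, defaultdict, Counter
--
-- def find_connected_all_directions_by_color(grid, color):
--     rows = len(grid)
--     cols = len(grid[0]) if rows > 0 else 0
--     visited = [[False for _ in range(cols)] for _ in range(rows)]
--     components = []
--
--     directions = [(-1, -1), (-1, 0), (-1, 1), (0, -1), (0, 1), (1, -1), (1, 0), (1, 1)]
--
--     for r in range(rows):
--         for c in range(cols):
--             if grid[r][c] == color and not visited[r][c]:
--                 queue = deque()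
--                 queue.append((r, c))
--                 visited[r][c] = True
--                 component = set()
--                 component.add((r, c))
--
--                 while queue:
--                     current_r, current_c = queue.popleft()
--                     for dr, dc in directions:
--                         nr, nc = current_r + dr, current_c + dc
--                         if 0 <= nr < rows and 0 <= nc < cols:
--                             if grid[nr][nc] == color and not visited[nr][nc]:
--                                 visited[nr][nc] = True
--                                 queue.append((nr, nc))
--                                 component.add((nr, nc))
--                 components.append(component)
--     return components
-- ===== SOURCE B (Python) =====
-- def find_connected_all_directions_by_color(grid, color):
--     # Union-structure pass (no BFS, no queue, no visited matrix): scan row-major,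
--     # union each matching cell with its already-scanned matching neighbors via an
--     # owner map cell -> seed (row-major minimum of its component) and a seed-keyed
--     # component dict; absorbed seeds stay as stale keys and are filtered at the end.
--     cols = len(grid[0]) if len(grid) > 0 else 0
--     owner = {}
--     comps = {}
--     for r in range(len(grid)):
--         for c in range(cols):
--             if grid[r][c] == color:
--                 seeds = set()
--                 for q in ((r - 1, c - 1), (r - 1, c), (r - 1, c + 1), (r, c - 1)):
--                     if q in owner:
--                         seeds.add(owner[q])
--                 if not seeds:
--                     owner[(r, c)] = (r, c)
--                     comps[(r, c)] = {(r, c)}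
--                 else:
--                     dest = min(seeds)
--                     owner[(r, c)] = dest
--                     comps[dest].add((r, c))
--                     for s in seeds:
--                         if s != dest:
--                             for q in comps[s]:
--                                 owner[q] = dest
--                             comps[dest] |= comps[s]
--     return [comps[s] for s in comps if owner[s] == s]
-- ===== Notes on version B (the rewrite author's own statement) =====
-- stated objective: alternative
-- what changed: A runs a per-seed BFS flood fill with a deque and a rows*cols visited matrix; B never traverses: it scans the grid row-major once and unions each matching cell with its already-scanned matching neighbors through an owner map (cell -> component seed, the row-major minimum) and a seed-keyed component dict, filtering out absorbed (stale) seeds at the end.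
-- outside the precondition, e.g. on find_connected_all_directions_by_color([[1, 2], [1]], 1): A raises IndexError, B raises IndexError
import Mathlib
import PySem

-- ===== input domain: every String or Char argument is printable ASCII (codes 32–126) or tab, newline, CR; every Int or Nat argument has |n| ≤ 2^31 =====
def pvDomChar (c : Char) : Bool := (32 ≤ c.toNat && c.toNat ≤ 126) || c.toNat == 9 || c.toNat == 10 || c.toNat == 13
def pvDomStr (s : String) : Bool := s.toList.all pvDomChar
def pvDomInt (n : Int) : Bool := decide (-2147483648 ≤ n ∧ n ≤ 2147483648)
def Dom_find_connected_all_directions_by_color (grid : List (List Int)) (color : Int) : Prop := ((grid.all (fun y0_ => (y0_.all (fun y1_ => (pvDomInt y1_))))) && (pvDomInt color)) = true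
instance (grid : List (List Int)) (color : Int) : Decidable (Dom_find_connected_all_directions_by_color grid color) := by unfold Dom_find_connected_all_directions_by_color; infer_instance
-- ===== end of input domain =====

-- B replaces A's per-seed BFS flood fill (deque + visited matrix) by a single row-major
-- union pass: each matching cell is united with its already-scanned matching neighbors
-- through an owner map (cell -> component seed) and a seed-keyed component dict
-- (alternative algorithm, similar cost); equality of return values is proved on Pre_
-- below.  Both functions return a list of Python SETS; the ports represent each such
-- set canonically as its row-major sorted list of elements (sets carry no order).

-- ===== PORT A =====
-- helpers for port A (literal pieces of A's code)
def pvDirections : List (Int × Int) :=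
  [(-1, -1), (-1, 0), (-1, 1), (0, -1), (0, 1), (1, -1), (1, 0), (1, 1)]

-- grid[r][c]  (both Pythons read cells with exactly this expression)
def pvGridAt (grid : List (List Int)) (r c : Int) : Int :=
  PySem.List.pyGetD (PySem.List.pyGetD grid r []) c 0

-- row-major (lexicographic) order on cells: Python's tuple comparison
def pvLeB (a b : Int × Int) : Bool := decide (a.1 < b.1 ∨ (a.1 = b.1 ∧ a.2 ≤ b.2))
def pvLtB (a b : Int × Int) : Bool := decide (a.1 < b.1 ∨ (a.1 = b.1 ∧ a.2 < b.2))

-- canonical list representation of a Python set of cells (sets are unordered)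
def pvSort (l : List (Int × Int)) : List (Int × Int) := l.mergeSort pvLeB

-- visited[r][c]
def pvVget (v : List (List Bool)) (r c : Int) : Bool :=
  PySem.List.pyGetD (PySem.List.pyGetD v r []) c false

-- visited[r][c] = True
def pvVset (v : List (List Bool)) (r c : Int) : List (List Bool) :=
  PySem.List.pySetD v r (PySem.List.pySetD (PySem.List.pyGetD v r []) c true)

-- the shape invariant of A's visited matrix (rows × cols), threaded for termination
def pvShape (rows cols : Int) (v : List (List Bool)) : Prop :=
  (v.length : Int) = rows ∧ ∀ row ∈ v, (row.length : Int) = cols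

-- all grid positions, and the termination measures (number of not-yet-marked cells)
def pvRectL (rows cols : Int) : List (Int × Int) :=
  (PySem.List.pyRange 0 rows 1).flatMap (fun r => (PySem.List.pyRange 0 cols 1).map (fun c => (r, c)))

def pvUnvis (rows cols : Int) (v : List (List Bool)) : Nat :=
  ((pvRectL rows cols).filter (fun p => !pvVget v p.1 p.2)).length

-- body of A's inner `for dr, dc in directions` loop
def pvBodyA (grid : List (List Int)) (color rows cols : Int) (cur : Int × Int)
    (st : List (List Bool) × List (Int × Int) × List (Int × Int)) (d : Int × Int) :
    List (List Bool) × List (Int × Int) × List (Int × Int) :=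
  let nr := cur.1 + d.1
  let nc := cur.2 + d.2
  if 0 ≤ nr ∧ nr < rows ∧ 0 ≤ nc ∧ nc < cols then
    if pvGridAt grid nr nc = color ∧ pvVget st.1 nr nc = false then
      (pvVset st.1 nr nc, st.2.1 ++ [(nr, nc)], PySem.Set.add st.2.2 (nr, nc))
    else st
  else st

-- one dequeued cell: state is (visited, queue, component)
def pvStepA (grid : List (List Int)) (color rows cols : Int)
    (st : List (List Bool) × List (Int × Int) × List (Int × Int)) (cur : Int × Int) :
    List (List Bool) × List (Int × Int) × List (Int × Int) :=
  pvDirections.foldl (pvBodyA grid color rows cols cur) st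

-- generic strict filter-count lemma, used by the termination measures
lemma pvFilter_length_lt {α : Type} (l : List α) (p q : α → Bool)
    (hpq : ∀ a ∈ l, q a = true → p a = true) (a : α) (ha : a ∈ l)
    (hp : p a = true) (hq : q a = false) :
    (l.filter q).length < (l.filter p).length := by
  induction l with
  | nil => cases ha
  | cons x t ih =>
    have hle : (t.filter q).length ≤ (t.filter p).length := by
      simpa [← List.countP_eq_length_filter] using
        List.countP_mono_left (fun b hb => hpq b (List.mem_cons_of_mem _ hb))
    rcases List.mem_cons.mp ha with rfl | hat
    · simp [hp, hq]
      omega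
    · have ih' := ih (fun b hb => hpq b (List.mem_cons_of_mem _ hb)) hat
      by_cases hqx : q x = true
      · have hpx := hpq x List.mem_cons_self hqx
        simp [hqx, hpx]
        omega
      · by_cases hpx : p x = true <;>
          simp [hqx, hpx] at * <;> omega

lemma pvMem_pvRectL (rows cols r c : Int) :
    (r, c) ∈ pvRectL rows cols ↔ 0 ≤ r ∧ r < rows ∧ 0 ≤ c ∧ c < cols := by
  simp only [pvRectL, List.mem_flatMap, List.mem_map, PySem.List.mem_pyRange_one, Prod.mk.injEq]
  constructor
  · rintro ⟨a, ha, b, hb, rfl, rfl⟩; omega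
  · rintro ⟨h1, h2, h3, h4⟩; exact ⟨r, ⟨h1, h2⟩, c, ⟨h3, h4⟩, rfl, rfl⟩

lemma pvShape_vset (rows cols : Int) (v : List (List Bool)) (r c : Int)
    (hv : pvShape rows cols v) : pvShape rows cols (pvVset v r c) := by
  obtain ⟨hlen, hrow⟩ := hv
  unfold pvVset
  set w := PySem.List.pySetD (PySem.List.pyGetD v r []) c true with hw
  unfold PySem.List.pySetD PySem.List.pySet?
  cases hidx : PySem.List.pyIdx? v.length r with
  | none => exact ⟨by simpa using hlen, by simpa using hrow⟩
  | some k =>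
    have hin : PySem.Raise.InRange v.length r := by
      unfold PySem.List.pyIdx? at hidx
      constructor <;> (split_ifs at hidx <;> omega)
    simp only [Option.map_some, Option.getD_some]
    refine ⟨by simpa using hlen, ?_⟩
    intro row hmem
    rcases List.mem_or_eq_of_mem_set hmem with h | rfl
    · exact hrow _ h
    · rw [hw, PySem.List.length_pySetD]
      exact hrow _ (PySem.List.pyGetD_mem v [] hin)

lemma pvVget_toNat (v : List (List Bool)) (a b : Int) (ha : 0 ≤ a) (hb : 0 ≤ b) :
    pvVget v a b = (v.getD a.toNat []).getD b.toNat false := by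
  rw [pvVget]
  conv_lhs => rw [← Int.toNat_of_nonneg ha, ← Int.toNat_of_nonneg hb]
  rw [PySem.List.pyGetD_natCast, PySem.List.pyGetD_natCast]

lemma pvVset_toNat (v : List (List Bool)) (a b : Int) (ha : 0 ≤ a) (hb : 0 ≤ b) :
    pvVset v a b = v.set a.toNat ((v.getD a.toNat []).set b.toNat true) := by
  rw [pvVset, PySem.List.pySetD_of_nonneg _ _ hb, PySem.List.pySetD_of_nonneg _ _ ha]
  congr 2
  conv_lhs => rw [← Int.toNat_of_nonneg ha]
  rw [PySem.List.pyGetD_natCast]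

lemma pvAuxSet (l : List (List Bool)) (i j i' j' : Nat) (hi : i < l.length)
    (hj : j < (l.getD i []).length) :
    ((l.set i ((l.getD i []).set j true)).getD i' []).getD j' false =
      if i' = i ∧ j' = j then true else (l.getD i' []).getD j' false := by
  have hgi : l.getD i [] = l[i] := by
    rw [List.getD_eq_getElem?_getD, List.getElem?_eq_getElem hi]; rfl
  rw [List.getD_eq_getElem?_getD, List.getD_eq_getElem?_getD, List.getElem?_set]
  by_cases h1 : i = i'
  · subst h1
    simp only [hi, if_pos, Option.getD_some]
    rw [List.getElem?_set]
    by_cases h2 : j = j'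
    · subst h2
      have hj2 : j < (l[i]?.getD []).length := by
        rw [List.getElem?_eq_getElem hi]
        rw [hgi] at hj
        exact hj
      simp [hj2]
    · simp only [if_neg h2]
      rw [if_neg (by tauto), List.getD_eq_getElem?_getD, List.getD_eq_getElem?_getD]
  · rw [if_neg h1, if_neg (by tauto), List.getD_eq_getElem?_getD, List.getD_eq_getElem?_getD]

lemma pvVget_vset (rows cols : Int) (v : List (List Bool)) (r c r' c' : Int)
    (hv : pvShape rows cols v)
    (hr : 0 ≤ r) (hr2 : r < rows) (hc : 0 ≤ c) (hc2 : c < cols)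
    (hr' : 0 ≤ r') (_hr2' : r' < rows) (hc' : 0 ≤ c') (_hc2' : c' < cols) :
    pvVget (pvVset v r c) r' c' = if r' = r ∧ c' = c then true else pvVget v r' c' := by
  obtain ⟨hlen, hrow⟩ := hv
  have hrn : r.toNat < v.length := by omega
  have hgi : v.getD r.toNat [] = v[r.toNat] := by
    rw [List.getD_eq_getElem?_getD, List.getElem?_eq_getElem hrn]; rfl
  have hj : c.toNat < (v.getD r.toNat []).length := by
    rw [hgi]
    have := hrow _ (List.getElem_mem hrn)
    omega
  rw [pvVget_toNat _ _ _ hr' hc', pvVset_toNat _ _ _ hr hc, pvAuxSet _ _ _ _ _ hrn hj,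
    pvVget_toNat _ _ _ hr' hc']
  by_cases h1 : r' = r ∧ c' = c
  · rw [if_pos h1, if_pos (by omega)]
  · rw [if_neg h1, if_neg (by omega)]

lemma pvUnvis_vset_lt (rows cols : Int) (v : List (List Bool)) (r c : Int)
    (hv : pvShape rows cols v)
    (hr : 0 ≤ r) (hr2 : r < rows) (hc : 0 ≤ c) (hc2 : c < cols)
    (hfalse : pvVget v r c = false) :
    pvUnvis rows cols (pvVset v r c) < pvUnvis rows cols v := by
  have hmem := (pvMem_pvRectL rows cols r c).mpr ⟨hr, hr2, hc, hc2⟩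
  unfold pvUnvis
  refine pvFilter_length_lt _ _ _ ?_ (r, c) hmem (by simp [hfalse]) ?_
  · rintro ⟨a1, a2⟩ ha hqa
    rw [pvMem_pvRectL] at ha
    have hvv := pvVget_vset rows cols v r c a1 a2 hv hr hr2 hc hc2
      ha.1 ha.2.1 ha.2.2.1 ha.2.2.2
    rw [hvv] at hqa
    by_cases hcase : a1 = r ∧ a2 = c
    · rw [if_pos hcase] at hqa; simp at hqa
    · rw [if_neg hcase] at hqa; exact hqa
  · have hvv := pvVget_vset rows cols v r c r c hv hr hr2 hc hc2 hr hr2 hc hc2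
    simp [hvv]

-- invariant used by pvBfsA's termination
lemma pvFoldA_inv (grid : List (List Int)) (color rows cols : Int) (cur : Int × Int)
    (l : List (Int × Int)) :
    ∀ st : List (List Bool) × List (Int × Int) × List (Int × Int), pvShape rows cols st.1 →
      pvShape rows cols (l.foldl (pvBodyA grid color rows cols cur) st).1 ∧
      2 * pvUnvis rows cols (l.foldl (pvBodyA grid color rows cols cur) st).1 +
          (l.foldl (pvBodyA grid color rows cols cur) st).2.1.length ≤
        2 * pvUnvis rows cols st.1 + st.2.1.length := by
  induction l with
  | nil => exact fun st hst => ⟨hst, le_refl _⟩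
  | cons d t ih =>
    intro st hst
    have hb : pvShape rows cols (pvBodyA grid color rows cols cur st d).1 ∧
        2 * pvUnvis rows cols (pvBodyA grid color rows cols cur st d).1 +
            (pvBodyA grid color rows cols cur st d).2.1.length ≤
          2 * pvUnvis rows cols st.1 + st.2.1.length := by
      simp only [pvBodyA]
      split_ifs with h1 h2
      · refine ⟨pvShape_vset rows cols _ _ _ hst, ?_⟩
        have := pvUnvis_vset_lt rows cols st.1 _ _ hst h1.1 h1.2.1 h1.2.2.1 h1.2.2.2 h2.2
        simp only [List.length_append, List.length_cons, List.length_nil]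
        omega
      · exact ⟨hst, le_refl _⟩
      · exact ⟨hst, le_refl _⟩
    obtain ⟨s1, s2⟩ := ih (pvBodyA grid color rows cols cur st d) hb.1
    exact ⟨s1, by rw [List.foldl_cons]; omega⟩

lemma pvStepA_inv (grid : List (List Int)) (color rows cols : Int) (cur : Int × Int)
    (st : List (List Bool) × List (Int × Int) × List (Int × Int)) (hv : pvShape rows cols st.1) :
    pvShape rows cols (pvStepA grid color rows cols st cur).1 ∧
    2 * pvUnvis rows cols (pvStepA grid color rows cols st cur).1 +
        (pvStepA grid color rows cols st cur).2.1.length ≤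
      2 * pvUnvis rows cols st.1 + st.2.1.length :=
  pvFoldA_inv grid color rows cols cur pvDirections st hv

-- A's `while queue:` loop; returns (visited, component) (with the preserved shape proof)
def pvBfsA (grid : List (List Int)) (color rows cols : Int)
    (v : List (List Bool)) (q : List (Int × Int)) (comp : List (Int × Int))
    (hv : pvShape rows cols v) :
    {p : List (List Bool) × List (Int × Int) // pvShape rows cols p.1} :=
  match q with
  | [] => ⟨(v, comp), hv⟩
  | cur :: rest =>
      let st := pvStepA grid color rows cols (v, rest, comp) cur
      pvBfsA grid color rows cols st.1 st.2.1 st.2.2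
        (pvStepA_inv grid color rows cols cur (v, rest, comp) hv).1
termination_by 2 * pvUnvis rows cols v + q.length
decreasing_by
  have h := (pvStepA_inv grid color rows cols cur (v, rest, comp) hv).2
  simp only [st] at h ⊢
  simp only [List.length_cons]
  omega

lemma pvShape_v0 (rows cols : Int) (hr : 0 ≤ rows) (hc : 0 ≤ cols) :
    pvShape rows cols
      ((PySem.List.pyRange 0 rows 1).map (fun _ => (PySem.List.pyRange 0 cols 1).map (fun _ => false))) := by
  constructor
  · simp [PySem.List.length_pyRange_one]
    omega
  · intro row hmem
    simp only [List.mem_map] at hmem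
    obtain ⟨_, _, rfl⟩ := hmem
    simp [PySem.List.length_pyRange_one]
    omega

def find_connected_all_directions_by_color (grid : List (List Int)) (color : Int) :
    List (List (Int × Int)) :=
  let rows : Int := (grid.length : Int)
  let cols : Int := if rows > 0 then ((PySem.List.pyGetD grid 0 []).length : Int) else 0
  have hc : 0 ≤ cols := by
    dsimp only [cols]; split <;> simp
  ((PySem.List.pyRange 0 rows 1).foldl
    (fun (st : {p : List (List Bool) × List (List (Int × Int)) // pvShape rows cols p.1}) (r : Int) =>
      (PySem.List.pyRange 0 cols 1).foldl
        (fun st (c : Int) =>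
          if pvGridAt grid r c = color ∧ pvVget st.1.1 r c = false then
            let res := pvBfsA grid color rows cols (pvVset st.1.1 r c) [(r, c)]
                (PySem.Set.add PySem.Set.empty (r, c)) (pvShape_vset rows cols st.1.1 r c st.2)
            -- the appended value is a Python set: represented row-major sorted
            ⟨(res.1.1, st.1.2 ++ [pvSort res.1.2]), res.2⟩
          else st) st)
    ⟨((PySem.List.pyRange 0 rows 1).map (fun _ => (PySem.List.pyRange 0 cols 1).map (fun _ => false)), []),
      pvShape_v0 rows cols (by dsimp only [rows]; positivity) hc⟩).1.2

-- ===== PORT B =====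
-- the four already-scanned neighbor positions probed by Source B, in Source B's order
def pvScan4 (r c : Int) : List (Int × Int) :=
  [(r - 1, c - 1), (r - 1, c), (r - 1, c + 1), (r, c - 1)]

-- min(seeds): Python's min over tuples (lexicographic); seeds is a nonempty set
def pvMinCell (l : List (Int × Int)) (dflt : Int × Int) : Int × Int :=
  match l with
  | [] => dflt
  | x :: xs => xs.foldl (fun m y => if pvLtB y m then y else m) x

-- `for s in seeds: if s != dest: …` — re-own comps[s] and absorb it into comps[dest]
def pvAbsorb (dest : Int × Int)
    (st : PySem.Dict (Int × Int) (Int × Int) × PySem.Dict (Int × Int) (List (Int × Int)))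
    (s : Int × Int) :
    PySem.Dict (Int × Int) (Int × Int) × PySem.Dict (Int × Int) (List (Int × Int)) :=
  if s ≠ dest then
    ((st.2.getD s []).foldl (fun o q => o.insert q dest) st.1,
     st.2.insert dest (PySem.Set.update (st.2.getD dest []) (st.2.getD s [])))
  else st

-- body of Source B's double loop: one cell (r, c)
def pvCellStepB (grid : List (List Int)) (color : Int)
    (st : PySem.Dict (Int × Int) (Int × Int) × PySem.Dict (Int × Int) (List (Int × Int)))
    (r c : Int) :
    PySem.Dict (Int × Int) (Int × Int) × PySem.Dict (Int × Int) (List (Int × Int)) :=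
  if pvGridAt grid r c = color then
    let seeds : List (Int × Int) :=
      (pvScan4 r c).foldl
        (fun sl q => if st.1.contains q then PySem.Set.add sl (st.1.getD q (0, 0)) else sl) []
    if seeds = [] then
      (st.1.insert (r, c) (r, c), st.2.insert (r, c) [(r, c)])
    else
      let dest := pvMinCell seeds (0, 0)
      seeds.foldl (pvAbsorb dest)
        (st.1.insert (r, c) dest,
         st.2.insert dest (PySem.Set.add (st.2.getD dest []) (r, c)))
  else st

def find_connected_all_directions_by_color_alt (grid : List (List Int)) (color : Int) :
    List (List (Int × Int)) :=
  let cols : Int := if (grid.length : Int) > 0 then ((PySem.List.pyGetD grid 0 []).length : Int) else 0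
  let st :=
    (PySem.List.pyRange 0 (grid.length : Int) 1).foldl
      (fun st r =>
        (PySem.List.pyRange 0 cols 1).foldl (fun st c => pvCellStepB grid color st r c) st)
      (PySem.Dict.empty, PySem.Dict.empty)
  -- `[comps[s] for s in comps if owner[s] == s]`: values are Python sets,
  -- represented row-major sorted
  (st.2.keys.filter (fun s => st.1.getD s (0, 0) == s)).map (fun s => pvSort (st.2.getD s []))

-- ===== PRECONDITION & SPEC =====
-- Pre_ excludes exactly the ragged grids on which Python A raises IndexError: a row
-- shorter than row 0 is indexed at a column ≥ its length.  (A returns on all other inputs.)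
def Pre_find_connected_all_directions_by_color (grid : List (List Int)) (color : Int) : Prop :=
  ∀ row ∈ grid, (grid.headD []).length ≤ row.length
instance (grid : List (List Int)) (color : Int) : Decidable (Pre_find_connected_all_directions_by_color grid color) := by unfold Pre_find_connected_all_directions_by_color; infer_instance

def pvWitness_find_connected_all_directions_by_color : List (List Int) × Int :=
  ([[1, 0, 1], [1, 1, 0]], 1)

def Spec_find_connected_all_directions_by_color (grid : List (List Int)) (color : Int) (out : List (List (Int × Int))) : Prop := out = find_connected_all_directions_by_color_alt grid color
instance (grid : List (List Int)) (color : Int) (out : List (List (Int × Int))) : Decidable (Spec_find_connected_all_directions_by_color grid color out) := by unfold Spec_find_connected_all_directions_by_color; infer_instance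

-- ===== CLAIM (what is proved, stated in full; the proofs are below) =====
def Claim_equal_find_connected_all_directions_by_color : Prop := ∀ (grid : List (List Int)) (color : Int), Dom_find_connected_all_directions_by_color grid color → Pre_find_connected_all_directions_by_color grid color → Spec_find_connected_all_directions_by_color grid color (find_connected_all_directions_by_color grid color)

-- ===== LEMMAS AND PROOFS =====

-- ---------- row-major (lexicographic) order on cells ----------
def pvRmLe (a b : Int × Int) : Prop := a.1 < b.1 ∨ (a.1 = b.1 ∧ a.2 ≤ b.2)
def pvRmLt (a b : Int × Int) : Prop := a.1 < b.1 ∨ (a.1 = b.1 ∧ a.2 < b.2)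

lemma pvRmLe_iff_leB (a b : Int × Int) : pvRmLe a b ↔ pvLeB a b = true := by
  simp [pvRmLe, pvLeB]

lemma pvRmLt_iff_ltB (a b : Int × Int) : pvRmLt a b ↔ pvLtB a b = true := by
  simp [pvRmLt, pvLtB]

lemma pvRmLe_refl (a : Int × Int) : pvRmLe a a := by simp [pvRmLe]

lemma pvRmLe_total (a b : Int × Int) : pvRmLe a b ∨ pvRmLe b a := by
  simp only [pvRmLe]; omega

lemma pvRmLe_trans {a b c : Int × Int} : pvRmLe a b → pvRmLe b c → pvRmLe a c := by
  simp only [pvRmLe]; omega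

lemma pvRmLe_antisymm {a b : Int × Int} (h1 : pvRmLe a b) (h2 : pvRmLe b a) : a = b := by
  obtain ⟨x1, y1⟩ := a; obtain ⟨x2, y2⟩ := b
  simp only [pvRmLe, Prod.mk.injEq] at *
  omega

lemma pvRmLt_ne {a b : Int × Int} (h : pvRmLt a b) : a ≠ b := by
  obtain ⟨x1, y1⟩ := a; obtain ⟨x2, y2⟩ := b
  simp only [pvRmLt, ne_eq, Prod.mk.injEq] at *
  omega

lemma pvRmLt_of_le_ne {a b : Int × Int} (h : pvRmLe a b) (hne : a ≠ b) : pvRmLt a b := by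
  obtain ⟨x1, y1⟩ := a; obtain ⟨x2, y2⟩ := b
  simp only [pvRmLe, pvRmLt, ne_eq, Prod.mk.injEq] at *
  omega

lemma pvRmLe_of_lt {a b : Int × Int} (h : pvRmLt a b) : pvRmLe a b := by
  simp only [pvRmLe, pvRmLt] at *; omega

lemma pvRmLt_not_le {a b : Int × Int} (h : pvRmLt a b) : ¬ pvRmLe b a := by
  simp only [pvRmLe, pvRmLt] at *; omega

lemma pvNodup_of_pairwise_lt {l : List (Int × Int)} (h : List.Pairwise pvRmLt l) : l.Nodup :=
  h.imp (fun hab => pvRmLt_ne hab)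

lemma pvSort_pairwise (l : List (Int × Int)) : List.Pairwise pvRmLe (pvSort l) := by
  have := List.sorted_mergeSort (le := pvLeB)
    (fun a b c hab hbc => by
      rw [← pvRmLe_iff_leB] at *; exact pvRmLe_trans hab hbc)
    (fun a b => by
      rcases pvRmLe_total a b with h | h
      · simp [(pvRmLe_iff_leB a b).mp h]
      · simp [(pvRmLe_iff_leB b a).mp h]) l
  exact this.imp (fun h => (pvRmLe_iff_leB _ _).mpr h)

lemma pvSort_perm (l : List (Int × Int)) : (pvSort l).Perm l := List.mergeSort_perm l pvLeB

-- canonical-form lemma: a nodup list sorts to the unique strictly-sorted list with the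
-- same members
lemma pvSort_eq {l l' : List (Int × Int)} (hl : l.Nodup) (hl' : List.Pairwise pvRmLt l')
    (h : ∀ x, x ∈ l ↔ x ∈ l') : pvSort l = l' := by
  have hnd' : l'.Nodup := pvNodup_of_pairwise_lt hl'
  have hperm : l.Perm l' := by
    refine List.perm_of_nodup_nodup_toFinset_eq hl hnd' ?_
    ext x
    simp only [List.mem_toFinset]
    exact h x
  refine List.eq_of_perm_of_sorted (le := pvRmLe) ?_ (pvSort_pairwise l) (hl'.imp pvRmLe_of_lt)
    ((pvSort_perm l).trans hperm)
  intro a b _ _ hab hba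
  exact pvRmLe_antisymm hab hba

-- ---------- the rectangle is row-major sorted ----------
lemma pvPyRange_pairwise_aux (k : Nat) :
    ∀ a b : Int, (b - a).toNat ≤ k → List.Pairwise (· < ·) (PySem.List.pyRange a b 1) := by
  induction k with
  | zero =>
    intro a b h
    have : PySem.List.pyRange a b 1 = [] := by
      refine List.eq_nil_iff_forall_not_mem.mpr (fun x hx => ?_)
      rw [PySem.List.mem_pyRange_one] at hx
      omega
    simp [this]
  | succ k ih =>
    intro a b h
    by_cases hab : a < b
    · rw [PySem.List.pyRange_one_cons hab]
      refine List.pairwise_cons.mpr ⟨?_, ih (a + 1) b (by omega)⟩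
      intro x hx
      rw [PySem.List.mem_pyRange_one] at hx
      omega
    · have : PySem.List.pyRange a b 1 = [] := by
        refine List.eq_nil_iff_forall_not_mem.mpr (fun x hx => ?_)
        rw [PySem.List.mem_pyRange_one] at hx
        omega
      simp [this]

lemma pvPyRange_pairwise (a b : Int) : List.Pairwise (· < ·) (PySem.List.pyRange a b 1) :=
  pvPyRange_pairwise_aux (b - a).toNat a b le_rfl

lemma pvRectL_pairwise (rows cols : Int) : List.Pairwise pvRmLt (pvRectL rows cols) := by
  unfold pvRectL
  rw [List.pairwise_flatMap]
  constructor
  · intro r _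
    rw [List.pairwise_map]
    exact (pvPyRange_pairwise 0 cols).imp (fun h => by simp [pvRmLt]; omega)
  · refine (pvPyRange_pairwise 0 rows).imp ?_
    intro r1 r2 h12 x hx y hy
    simp only [List.mem_map] at hx hy
    obtain ⟨c1, _, rfl⟩ := hx
    obtain ⟨c2, _, rfl⟩ := hy
    simp [pvRmLt]; omega

-- ---------- the matching cells, in row-major order ----------
def pvMset (grid : List (List Int)) (color cols : Int) : List (Int × Int) :=
  (pvRectL (grid.length : Int) cols).filter (fun p => decide (pvGridAt grid p.1 p.2 = color))

lemma pvMset_pairwise (grid : List (List Int)) (color cols : Int) :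
    List.Pairwise pvRmLt (pvMset grid color cols) :=
  List.Pairwise.filter _ (pvRectL_pairwise _ _)

lemma pvMset_nodup (grid : List (List Int)) (color cols : Int) :
    (pvMset grid color cols).Nodup :=
  pvNodup_of_pairwise_lt (pvMset_pairwise grid color cols)

lemma pvMem_Mset (grid : List (List Int)) (color cols : Int) (p : Int × Int) :
    p ∈ pvMset grid color cols ↔
      (0 ≤ p.1 ∧ p.1 < (grid.length : Int) ∧ 0 ≤ p.2 ∧ p.2 < cols ∧
        pvGridAt grid p.1 p.2 = color) := by
  obtain ⟨r, c⟩ := p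
  simp only [pvMset, List.mem_filter, pvMem_pvRectL, decide_eq_true_eq]
  tauto

-- ---------- adjacency (8 directions) ----------
def pvAdj (a b : Int × Int) : Prop :=
  a ≠ b ∧ -1 ≤ a.1 - b.1 ∧ a.1 - b.1 ≤ 1 ∧ -1 ≤ a.2 - b.2 ∧ a.2 - b.2 ≤ 1

lemma pvAdj_symm {a b : Int × Int} (h : pvAdj a b) : pvAdj b a := by
  obtain ⟨hne, h1, h2, h3, h4⟩ := h
  exact ⟨fun hc => hne hc.symm, by omega, by omega, by omega, by omega⟩

-- the candidate cells around cur, in A's direction order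
def pvNbrs (p : Int × Int) : List (Int × Int) := pvDirections.map (fun d => (p.1 + d.1, p.2 + d.2))

lemma pvMem_nbrs (p q : Int × Int) : q ∈ pvNbrs p ↔ pvAdj p q := by
  obtain ⟨a, b⟩ := p; obtain ⟨x, y⟩ := q
  simp only [pvNbrs, pvDirections, List.map_cons, List.map_nil, List.mem_cons,
    List.not_mem_nil, or_false, Prod.mk.injEq, pvAdj, ne_eq]
  omega

lemma pvMem_scan4 (p q : Int × Int) :
    q ∈ pvScan4 p.1 p.2 ↔ pvAdj p q ∧ pvRmLt q p := by
  obtain ⟨a, b⟩ := p; obtain ⟨x, y⟩ := q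
  simp only [pvScan4, List.mem_cons, List.not_mem_nil, or_false, Prod.mk.injEq, pvAdj,
    pvRmLt, ne_eq]
  omega

-- ---------- reachability within a vertex list ----------
def pvReach (S : List (Int × Int)) (a b : Int × Int) : Prop :=
  Relation.ReflTransGen (fun x y => y ∈ S ∧ pvAdj x y) a b

lemma pvReach_refl (S : List (Int × Int)) (a : Int × Int) : pvReach S a a :=
  Relation.ReflTransGen.refl

lemma pvReach_single {S : List (Int × Int)} {a b : Int × Int} (hb : b ∈ S) (h : pvAdj a b) :
    pvReach S a b :=
  Relation.ReflTransGen.single ⟨hb, h⟩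

lemma pvReach_mem {S : List (Int × Int)} {a b : Int × Int} (ha : a ∈ S) (h : pvReach S a b) :
    b ∈ S := by
  induction h with
  | refl => exact ha
  | tail _ hstep _ => exact hstep.1

lemma pvReach_symm {S : List (Int × Int)} {a b : Int × Int} (ha : a ∈ S) (h : pvReach S a b) :
    pvReach S b a := by
  induction h with
  | refl => exact pvReach_refl S a
  | tail hr hstep ih =>
    exact Relation.ReflTransGen.head ⟨pvReach_mem ha hr, pvAdj_symm hstep.2⟩ ih

lemma pvReach_mono {S S' : List (Int × Int)} (hsub : ∀ x ∈ S, x ∈ S') {a b : Int × Int}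
    (h : pvReach S a b) : pvReach S' a b :=
  Relation.ReflTransGen.mono (fun x y hxy => ⟨hsub y hxy.1, hxy.2⟩) h

-- ---------- vertex-addition surgery ----------
-- forward decomposition of a path in S ++ [p]
lemma pvReach_snoc_to {S : List (Int × Int)} {p : Int × Int} (hp : p ∉ S)
    {x z : Int × Int} (hx : x ∈ S) (h : pvReach (S ++ [p]) x z) :
    (z ∈ S →
      (pvReach S x z ∨
        ∃ u ∈ S, ∃ v ∈ S, pvAdj u p ∧ pvAdj p v ∧ pvReach S x u ∧ pvReach S v z)) ∧
    (z = p →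
      ∃ u ∈ S, pvAdj u p ∧
        (pvReach S x u ∨
          ∃ u' ∈ S, ∃ v ∈ S, pvAdj u' p ∧ pvAdj p v ∧ pvReach S x u' ∧ pvReach S v u)) := by
  induction h with
  | refl =>
    exact ⟨fun _ => Or.inl (pvReach_refl S x), fun hxp => absurd (hxp ▸ hx) hp⟩
  | @tail b z hr hstep ih =>
    obtain ⟨hzS', hadj⟩ := hstep
    have hbS' : b ∈ S ++ [p] := pvReach_mem (List.mem_append.mpr (Or.inl hx)) hr
    rcases List.mem_append.mp hbS' with hbS | hbp
    · have hA := ih.1 hbS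
      constructor
      · intro hzS
        rcases hA with h1 | ⟨u, hu, v, hv, hup, hpv, hxu, hvb⟩
        · exact Or.inl (h1.tail ⟨hzS, hadj⟩)
        · exact Or.inr ⟨u, hu, v, hv, hup, hpv, hxu, hvb.tail ⟨hzS, hadj⟩⟩
      · intro hzp
        subst hzp
        exact ⟨b, hbS, hadj, hA⟩
    · have hbp' : b = p := List.mem_singleton.mp hbp
      subst hbp'
      constructor
      · intro hzS
        obtain ⟨u, hu, hup, hAu⟩ := ih.2 rfl
        right
        rcases hAu with h1 | ⟨u', hu', v, hv, hup', hpv, hxu', hvu⟩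
        · exact ⟨u, hu, z, hzS, hup, hadj, h1, pvReach_refl S z⟩
        · exact ⟨u', hu', z, hzS, hup', hadj, hxu', pvReach_refl S z⟩
      · intro hzp
        subst hzp
        exact absurd rfl hadj.1

lemma pvReach_snoc_iff {S : List (Int × Int)} {p : Int × Int} (hp : p ∉ S)
    {x y : Int × Int} (hx : x ∈ S) (hy : y ∈ S) :
    pvReach (S ++ [p]) x y ↔
      (pvReach S x y ∨
        ∃ u ∈ S, ∃ v ∈ S, pvAdj u p ∧ pvAdj p v ∧ pvReach S x u ∧ pvReach S v y) := by
  constructor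
  · intro h
    exact (pvReach_snoc_to hp hx h).1 hy
  · intro h
    have hsub : ∀ a ∈ S, a ∈ S ++ [p] := fun a ha => List.mem_append.mpr (Or.inl ha)
    rcases h with h1 | ⟨u, hu, v, hv, hup, hpv, hxu, hvy⟩
    · exact pvReach_mono hsub h1
    · refine ((pvReach_mono hsub hxu).tail
        ⟨List.mem_append.mpr (Or.inr (List.mem_singleton_self _)), hup⟩).trans ?_
      exact Relation.ReflTransGen.head ⟨hsub v hv, hpv⟩ (pvReach_mono hsub hvy)

lemma pvReach_snoc_p_iff {S : List (Int × Int)} {p : Int × Int} (hp : p ∉ S)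
    {x : Int × Int} (hx : x ∈ S) :
    pvReach (S ++ [p]) x p ↔ ∃ u ∈ S, pvAdj u p ∧ pvReach S x u := by
  constructor
  · intro h
    obtain ⟨u, hu, hup, hAu⟩ := (pvReach_snoc_to hp hx h).2 rfl
    rcases hAu with h1 | ⟨u', hu', v, hv, hup', hpv, hxu', hvu⟩
    · exact ⟨u, hu, hup, h1⟩
    · exact ⟨u', hu', hup', hxu'⟩
  · rintro ⟨u, hu, hup, hxu⟩
    have hsub : ∀ a ∈ S, a ∈ S ++ [p] := fun a ha => List.mem_append.mpr (Or.inl ha)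
    exact (pvReach_mono hsub hxu).tail
      ⟨List.mem_append.mpr (Or.inr (List.mem_singleton_self _)), hup⟩

lemma pvReach_snoc_from_p_iff {S : List (Int × Int)} {p : Int × Int} (hp : p ∉ S)
    {y : Int × Int} (hy : y ∈ S) :
    pvReach (S ++ [p]) p y ↔ ∃ v ∈ S, pvAdj p v ∧ pvReach S v y := by
  have hpS' : p ∈ S ++ [p] := List.mem_append.mpr (Or.inr (List.mem_singleton_self _))
  have hyS' : y ∈ S ++ [p] := List.mem_append.mpr (Or.inl hy)
  constructor
  · intro h
    obtain ⟨u, hu, hup, hyu⟩ := (pvReach_snoc_p_iff hp hy).mp (pvReach_symm hpS' h)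
    exact ⟨u, hu, pvAdj_symm hup, pvReach_symm hy hyu⟩
  · rintro ⟨v, hv, hpv, hvy⟩
    have hsub : ∀ a ∈ S, a ∈ S ++ [p] := fun a ha => List.mem_append.mpr (Or.inl ha)
    exact Relation.ReflTransGen.head ⟨hsub v hv, hpv⟩ (pvReach_mono hsub hvy)


-- ---------- canonical components: reachability classes ordered by seed ----------
noncomputable def pvClassL (M : List (Int × Int)) (s : Int × Int) : List (Int × Int) :=
  M.filter (fun q => @decide _ (Classical.propDecidable (pvReach M s q)))

def pvIsSeed (M : List (Int × Int)) (s : Int × Int) : Prop :=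
  ∀ q ∈ M, pvReach M s q → pvRmLe s q

noncomputable def pvCanon (M : List (Int × Int)) : List (List (Int × Int)) :=
  (M.filter (fun s => @decide _ (Classical.propDecidable (pvIsSeed M s)))).map (pvClassL M)

lemma pvMem_classL (M : List (Int × Int)) (s q : Int × Int) :
    q ∈ pvClassL M s ↔ q ∈ M ∧ pvReach M s q := by
  simp [pvClassL]

lemma pvClassL_pairwise {M : List (Int × Int)} (hM : List.Pairwise pvRmLt M)
    (s : Int × Int) : List.Pairwise pvRmLt (pvClassL M s) :=
  List.Pairwise.filter _ hM

-- ---------- the old frontier-level BFS (proof-internal reference implementation) ----------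
def pvBodyB2 (grid : List (List Int)) (color cols : Int) (cur : Int × Int) (nr : Int)
    (st : List (Int × Int) × List (Int × Int) × List (Int × Int)) (nc : Int) :
    List (Int × Int) × List (Int × Int) × List (Int × Int) :=
  if (nr, nc) ≠ (cur.1, cur.2) ∧ 0 ≤ nr ∧ nr < (grid.length : Int) ∧ 0 ≤ nc ∧ nc < cols then
    if pvGridAt grid nr nc = color ∧ (nr, nc) ∉ st.1 then
      (PySem.Set.add st.1 (nr, nc), st.2.1 ++ [(nr, nc)], st.2.2 ++ [(nr, nc)])
    else st
  else st

def pvBodyB1 (grid : List (List Int)) (color cols : Int) (cur : Int × Int)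
    (st : List (Int × Int) × List (Int × Int) × List (Int × Int)) (nr : Int) :
    List (Int × Int) × List (Int × Int) × List (Int × Int) :=
  [cur.2 - 1, cur.2, cur.2 + 1].foldl (pvBodyB2 grid color cols cur nr) st

-- one frontier cell: state is (seen, new_frontier, component)
def pvStepB (grid : List (List Int)) (color cols : Int)
    (st : List (Int × Int) × List (Int × Int) × List (Int × Int)) (cur : Int × Int) :
    List (Int × Int) × List (Int × Int) × List (Int × Int) :=
  [cur.1 - 1, cur.1, cur.1 + 1].foldl (pvBodyB1 grid color cols cur) st

-- generic: folding an append-only step preserves the "fresh cells appended everywhere" shape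
lemma pvQcomp {gam : Type} (good : Int × Int → Prop)
    (body : (List (Int × Int) × List (Int × Int) × List (Int × Int)) → gam →
      (List (Int × Int) × List (Int × Int) × List (Int × Int)))
    (hb : ∀ st x, ∃ add, body st x = (st.1 ++ add, st.2.1 ++ add, st.2.2 ++ add) ∧
      (∀ p ∈ add, p ∉ st.1 ∧ good p) ∧ add.Nodup) :
    ∀ (l : List gam) st, ∃ add,
      l.foldl body st = (st.1 ++ add, st.2.1 ++ add, st.2.2 ++ add) ∧
      (∀ p ∈ add, p ∉ st.1 ∧ good p) ∧ add.Nodup := by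
  intro l
  induction l with
  | nil => exact fun st => ⟨[], by simp⟩
  | cons x t ih =>
    intro st
    obtain ⟨a1, he1, hf1, hn1⟩ := hb st x
    obtain ⟨a2, he2, hf2, hn2⟩ := ih (body st x)
    rw [he1] at hf2
    refine ⟨a1 ++ a2, ?_, ?_, ?_⟩
    · rw [List.foldl_cons, he2, he1]
      simp [List.append_assoc]
    · intro p hp
      rcases List.mem_append.mp hp with h | h
      · exact hf1 p h
      · have := hf2 p h
        exact ⟨fun hmem => this.1 (List.mem_append.mpr (Or.inl hmem)), this.2⟩
    · rw [List.nodup_append]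
      exact ⟨hn1, hn2, fun p hp1 b hb2 heq =>
        (hf2 b hb2).1 (List.mem_append.mpr (Or.inr (heq ▸ hp1)))⟩

-- characterization of the frontier scan, used for termination
lemma pvFoldB_char (grid : List (List Int)) (color cols : Int) (l : List (Int × Int)) :
    ∀ st : List (Int × Int) × List (Int × Int) × List (Int × Int),
      ∃ add : List (Int × Int),
        l.foldl (pvStepB grid color cols) st = (st.1 ++ add, st.2.1 ++ add, st.2.2 ++ add) ∧
        (∀ p ∈ add, p ∉ st.1 ∧ (0 ≤ p.1 ∧ p.1 < (grid.length : Int) ∧ 0 ≤ p.2 ∧ p.2 < cols)) ∧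
        add.Nodup := by
  have h2 : ∀ cur nr st nc, ∃ add,
      pvBodyB2 grid color cols cur nr st nc = (st.1 ++ add, st.2.1 ++ add, st.2.2 ++ add) ∧
      (∀ p ∈ add, p ∉ st.1 ∧ (0 ≤ p.1 ∧ p.1 < (grid.length : Int) ∧ 0 ≤ p.2 ∧ p.2 < cols)) ∧
      add.Nodup := by
    intro cur nr st nc
    unfold pvBodyB2
    split_ifs with hg1 hg2
    · refine ⟨[(nr, nc)], ?_, ?_, by simp⟩
      · rw [PySem.Set.add_of_not_mem hg2.2]
      · rintro p hp
        rw [List.mem_singleton] at hp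
        subst hp
        exact ⟨hg2.2, hg1.2⟩
    · exact ⟨[], by simp⟩
    · exact ⟨[], by simp⟩
  have h1 : ∀ cur st nr, ∃ add,
      pvBodyB1 grid color cols cur st nr = (st.1 ++ add, st.2.1 ++ add, st.2.2 ++ add) ∧
      (∀ p ∈ add, p ∉ st.1 ∧ (0 ≤ p.1 ∧ p.1 < (grid.length : Int) ∧ 0 ≤ p.2 ∧ p.2 < cols)) ∧
      add.Nodup := by
    intro cur st nr
    exact pvQcomp _ _ (h2 cur nr) _ st
  have hS : ∀ st cur, ∃ add,
      pvStepB grid color cols st cur = (st.1 ++ add, st.2.1 ++ add, st.2.2 ++ add) ∧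
      (∀ p ∈ add, p ∉ st.1 ∧ (0 ≤ p.1 ∧ p.1 < (grid.length : Int) ∧ 0 ≤ p.2 ∧ p.2 < cols)) ∧
      add.Nodup := by
    intro st cur
    exact pvQcomp _ _ (h1 cur) _ st
  exact fun st => pvQcomp _ _ hS l st

def pvMuB (grid : List (List Int)) (cols : Int) (seen : List (Int × Int)) : Nat :=
  ((pvRectL (grid.length : Int) cols).filter (fun p => !PySem.Set.contains seen p)).length

lemma pvMuB_append_lt (grid : List (List Int)) (cols : Int) (seen add : List (Int × Int))
    (hadd : ∀ p ∈ add, p ∉ seen ∧ (0 ≤ p.1 ∧ p.1 < (grid.length : Int) ∧ 0 ≤ p.2 ∧ p.2 < cols))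
    (hne : add ≠ []) : pvMuB grid cols (seen ++ add) < pvMuB grid cols seen := by
  rcases add with _ | ⟨p0, rest⟩
  · cases hne rfl
  have hp0 := hadd p0 List.mem_cons_self
  unfold pvMuB
  refine pvFilter_length_lt _ _ _ ?_ p0 ?_ ?_ ?_
  · intro a _ hqa
    simp only [Bool.not_eq_true'] at hqa ⊢
    simp only [← Bool.not_eq_true] at hqa ⊢
    simp only [PySem.Set.contains_iff] at hqa ⊢
    exact fun hmem => hqa (List.mem_append.mpr (Or.inl hmem))
  · simpa using (pvMem_pvRectL _ _ p0.1 p0.2).mpr hp0.2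
  · simp only [Bool.not_eq_true', ← Bool.not_eq_true]
    simp only [PySem.Set.contains_iff]
    exact hp0.1
  · have hmem : p0 ∈ seen ++ p0 :: rest := List.mem_append.mpr (Or.inr List.mem_cons_self)
    simp only [Bool.not_eq_false', PySem.Set.contains_iff]
    exact hmem

-- the frontier `while` loop; returns (seen, component)
def pvBfsB (grid : List (List Int)) (color cols : Int)
    (seen : List (Int × Int)) (frontier : List (Int × Int)) (comp : List (Int × Int)) :
    List (Int × Int) × List (Int × Int) :=
  if h : frontier = [] then (seen, comp)
  else
    let st := frontier.foldl (pvStepB grid color cols) (seen, [], comp)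
    pvBfsB grid color cols st.1 st.2.1 st.2.2
termination_by (pvMuB grid cols seen, frontier.length)
decreasing_by
  obtain ⟨add, heq, hfresh, hnodup⟩ := pvFoldB_char grid color cols frontier (seen, [], comp)
  simp only [List.foldl_attach]
  rw [heq]
  by_cases hadd : add = []
  · subst hadd
    simp only [List.append_nil]
    exact Prod.Lex.right _ (by simp [List.length_pos_iff, h])
  · exact Prod.Lex.left _ _ (pvMuB_append_lt grid cols seen add hfresh hadd)

-- the frontier-level outer scan (reference form of A, seen as a list)
def pvFrontOuter (grid : List (List Int)) (color cols : Int) :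
    List (Int × Int) × List (List (Int × Int)) :=
  (PySem.List.pyRange 0 (grid.length : Int) 1).foldl
    (fun st r =>
      (PySem.List.pyRange 0 cols 1).foldl
        (fun (st : List (Int × Int) × List (List (Int × Int))) (c : Int) =>
          if pvGridAt grid r c = color ∧ (r, c) ∉ st.1 then
            let res := pvBfsB grid color cols (PySem.Set.add st.1 (r, c)) [(r, c)] [(r, c)]
            (res.1, st.2 ++ [pvSort res.2])
          else st) st)
    ([], [])

-- ---------- old A-to-frontier correspondence machinery ----------
-- the common correspondence invariant: the visited matrix marks exactly the seen set
def pvInv (grid : List (List Int)) (cols : Int) (v : List (List Bool)) (seen : List (Int × Int)) : Prop :=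
  pvShape (grid.length : Int) cols v ∧
  ∀ r c : Int, 0 ≤ r → r < (grid.length : Int) → 0 ≤ c → c < cols →
    (pvVget v r c = true ↔ (r, c) ∈ seen)

-- A's per-candidate action on (visited, discovered-cells)
def pvVisitA (grid : List (List Int)) (color cols : Int)
    (st : List (List Bool) × List (Int × Int)) (p : Int × Int) :
    List (List Bool) × List (Int × Int) :=
  if 0 ≤ p.1 ∧ p.1 < (grid.length : Int) ∧ 0 ≤ p.2 ∧ p.2 < cols then
    if pvGridAt grid p.1 p.2 = color ∧ pvVget st.1 p.1 p.2 = false then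
      (pvVset st.1 p.1 p.2, st.2 ++ [p])
    else st
  else st

-- frontier-side per-candidate action on (seen, discovered-cells)
def pvVisitB (grid : List (List Int)) (color cols : Int)
    (st : List (Int × Int) × List (Int × Int)) (p : Int × Int) :
    List (Int × Int) × List (Int × Int) :=
  if 0 ≤ p.1 ∧ p.1 < (grid.length : Int) ∧ 0 ≤ p.2 ∧ p.2 < cols then
    if pvGridAt grid p.1 p.2 = color ∧ p ∉ st.1 then
      (st.1 ++ [p], st.2 ++ [p])
    else st
  else st

-- A's full-state per-candidate action
def pvCellA (grid : List (List Int)) (color cols : Int)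
    (st : List (List Bool) × List (Int × Int) × List (Int × Int)) (p : Int × Int) :
    List (List Bool) × List (Int × Int) × List (Int × Int) :=
  if 0 ≤ p.1 ∧ p.1 < (grid.length : Int) ∧ 0 ≤ p.2 ∧ p.2 < cols then
    if pvGridAt grid p.1 p.2 = color ∧ pvVget st.1 p.1 p.2 = false then
      (pvVset st.1 p.1 p.2, st.2.1 ++ [p], PySem.Set.add st.2.2 p)
    else st
  else st

-- frontier-side full-state per-candidate action
def pvCellB (grid : List (List Int)) (color cols : Int)
    (st : List (Int × Int) × List (Int × Int) × List (Int × Int)) (p : Int × Int) :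
    List (Int × Int) × List (Int × Int) × List (Int × Int) :=
  if 0 ≤ p.1 ∧ p.1 < (grid.length : Int) ∧ 0 ≤ p.2 ∧ p.2 < cols then
    if pvGridAt grid p.1 p.2 = color ∧ p ∉ st.1 then
      (st.1 ++ [p], st.2.1 ++ [p], st.2.2 ++ [p])
    else st
  else st

-- one level of expansion on the A side
def pvExpA (grid : List (List Int)) (color cols : Int)
    (st : List (List Bool) × List (Int × Int)) (q : List (Int × Int)) :
    List (List Bool) × List (Int × Int) :=
  q.foldl (fun st cur => (pvNbrs cur).foldl (pvVisitA grid color cols) st) st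

lemma pvShiftA (grid : List (List Int)) (color cols : Int) (cl : List (Int × Int)) :
    ∀ v a, cl.foldl (pvVisitA grid color cols) (v, a) =
      ((cl.foldl (pvVisitA grid color cols) (v, [])).1,
        a ++ (cl.foldl (pvVisitA grid color cols) (v, [])).2) := by
  induction cl with
  | nil => intro v a; simp
  | cons p t ih =>
    intro v a
    rw [List.foldl_cons, List.foldl_cons]
    have hstep : ∀ b : List (Int × Int), pvVisitA grid color cols (v, b) p =
        ((pvVisitA grid color cols (v, []) p).1,
          b ++ (pvVisitA grid color cols (v, []) p).2) := by
      intro b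
      unfold pvVisitA
      split_ifs <;> simp
    rw [hstep a, hstep []]
    rcases hW : pvVisitA grid color cols (v, []) p with ⟨v1, d⟩
    dsimp only [List.nil_append]
    rw [ih v1 (a ++ d), ih v1 d]
    simp

lemma pvShiftB (grid : List (List Int)) (color cols : Int) (cl : List (Int × Int)) :
    ∀ s a, cl.foldl (pvVisitB grid color cols) (s, a) =
      ((cl.foldl (pvVisitB grid color cols) (s, [])).1,
        a ++ (cl.foldl (pvVisitB grid color cols) (s, [])).2) := by
  induction cl with
  | nil => intro s a; simp
  | cons p t ih =>
    intro s a
    rw [List.foldl_cons, List.foldl_cons]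
    have hstep : ∀ b : List (Int × Int), pvVisitB grid color cols (s, b) p =
        ((pvVisitB grid color cols (s, []) p).1,
          b ++ (pvVisitB grid color cols (s, []) p).2) := by
      intro b
      unfold pvVisitB
      split_ifs <;> simp
    rw [hstep a, hstep []]
    rcases hW : pvVisitB grid color cols (s, []) p with ⟨s1, d⟩
    dsimp only [List.nil_append]
    rw [ih s1 (a ++ d), ih s1 d]
    simp

lemma pvShiftExpA (grid : List (List Int)) (color cols : Int) (q : List (Int × Int)) :
    ∀ v a, pvExpA grid color cols (v, a) q =
      ((pvExpA grid color cols (v, []) q).1, a ++ (pvExpA grid color cols (v, []) q).2) := by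
  induction q with
  | nil => intro v a; simp [pvExpA]
  | cons cur t ih =>
    intro v a
    have ih' := ih
    simp only [pvExpA] at ih' ⊢
    rw [List.foldl_cons, List.foldl_cons]
    rw [pvShiftA grid color cols (pvNbrs cur) v a]
    rcases hW : (pvNbrs cur).foldl (pvVisitA grid color cols) (v, []) with ⟨v1, d⟩
    dsimp only [List.nil_append]
    rw [ih' v1 (a ++ d), ih' v1 d]
    simp

lemma pvCellA_fold (grid : List (List Int)) (color cols : Int) (cl : List (Int × Int)) :
    ∀ v q comp, cl.foldl (pvCellA grid color cols) (v, q, comp) =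
      ((cl.foldl (pvVisitA grid color cols) (v, [])).1,
        q ++ (cl.foldl (pvVisitA grid color cols) (v, [])).2,
        PySem.Set.update comp (cl.foldl (pvVisitA grid color cols) (v, [])).2) := by
  induction cl with
  | nil => intro v q comp; simp [PySem.Set.update_nil]
  | cons p t ih =>
    intro v q comp
    rw [List.foldl_cons, List.foldl_cons]
    have hstep : pvCellA grid color cols (v, q, comp) p =
        ((pvVisitA grid color cols (v, []) p).1,
          q ++ (pvVisitA grid color cols (v, []) p).2,
          PySem.Set.update comp (pvVisitA grid color cols (v, []) p).2) := by
      unfold pvCellA pvVisitA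
      split_ifs <;> simp [PySem.Set.update_cons, PySem.Set.update_nil]
    rw [hstep]
    rcases hW : pvVisitA grid color cols (v, []) p with ⟨v1, d⟩
    dsimp only [List.nil_append]
    rw [ih v1 (q ++ d) (PySem.Set.update comp d), pvShiftA grid color cols t v1 d]
    simp [PySem.Set.update_append]

lemma pvCellB_fold (grid : List (List Int)) (color cols : Int) (cl : List (Int × Int)) :
    ∀ s nf comp, cl.foldl (pvCellB grid color cols) (s, nf, comp) =
      ((cl.foldl (pvVisitB grid color cols) (s, [])).1,
        nf ++ (cl.foldl (pvVisitB grid color cols) (s, [])).2,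
        comp ++ (cl.foldl (pvVisitB grid color cols) (s, [])).2) := by
  induction cl with
  | nil => intro s nf comp; simp
  | cons p t ih =>
    intro s nf comp
    rw [List.foldl_cons, List.foldl_cons]
    have hstep : pvCellB grid color cols (s, nf, comp) p =
        ((pvVisitB grid color cols (s, []) p).1,
          nf ++ (pvVisitB grid color cols (s, []) p).2,
          comp ++ (pvVisitB grid color cols (s, []) p).2) := by
      unfold pvCellB pvVisitB
      split_ifs <;> simp
    rw [hstep]
    rcases hW : pvVisitB grid color cols (s, []) p with ⟨s1, d⟩
    dsimp only [List.nil_append]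
    rw [ih s1 (nf ++ d) (comp ++ d), pvShiftB grid color cols t s1 d]
    simp

lemma pvStepA_decomp (grid : List (List Int)) (color cols : Int)
    (v : List (List Bool)) (q comp : List (Int × Int)) (cur : Int × Int) :
    pvStepA grid color (grid.length : Int) cols (v, q, comp) cur =
      (pvNbrs cur).foldl (pvCellA grid color cols) (v, q, comp) := by
  rw [pvStepA, pvNbrs, List.foldl_map]
  rfl

lemma pvStepB_decomp (grid : List (List Int)) (color cols : Int)
    (st : List (Int × Int) × List (Int × Int) × List (Int × Int)) (cur : Int × Int) :
    pvStepB grid color cols st cur = (pvNbrs cur).foldl (pvCellB grid color cols) st := by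
  obtain ⟨cr, cc⟩ := cur
  have hcen : ∀ st, pvBodyB2 grid color cols (cr, cc) cr st cc = st := by
    intro st; simp [pvBodyB2]
  have hoff : ∀ nr nc : Int, ¬(nr = cr ∧ nc = cc) → ∀ st,
      pvBodyB2 grid color cols (cr, cc) nr st nc = pvCellB grid color cols st (nr, nc) := by
    intro nr nc h st
    have hne : ¬((nr, nc) : Int × Int) = (cr, cc) := by
      simp only [Prod.mk.injEq]; tauto
    simp only [pvBodyB2, pvCellB, ne_eq, hne, not_false_eq_true, true_and]
    split_ifs with h1 h2
    · rw [PySem.Set.add_of_not_mem h2.2]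
    · rfl
    · rfl
  simp only [pvStepB, pvBodyB1, pvNbrs, pvDirections, List.map_cons, List.map_nil,
    List.foldl_cons, List.foldl_nil]
  rw [hoff (cr - 1) (cc - 1) (by omega), hoff (cr - 1) cc (by omega),
    hoff (cr - 1) (cc + 1) (by omega), hoff cr (cc - 1) (by omega), hcen,
    hoff cr (cc + 1) (by omega), hoff (cr + 1) (cc - 1) (by omega),
    hoff (cr + 1) cc (by omega), hoff (cr + 1) (cc + 1) (by omega)]
  simp only [sub_eq_add_neg, add_zero]

lemma pvInv_vset (grid : List (List Int)) (cols : Int) (v : List (List Bool))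
    (seen : List (Int × Int)) (p : Int × Int) (hinv : pvInv grid cols v seen)
    (hrect : 0 ≤ p.1 ∧ p.1 < (grid.length : Int) ∧ 0 ≤ p.2 ∧ p.2 < cols) :
    pvInv grid cols (pvVset v p.1 p.2) (seen ++ [p]) := by
  obtain ⟨hsh, hiff⟩ := hinv
  refine ⟨pvShape_vset _ _ _ _ _ hsh, ?_⟩
  intro r c hr hr2 hc hc2
  rw [pvVget_vset (grid.length : Int) cols v p.1 p.2 r c hsh
    hrect.1 hrect.2.1 hrect.2.2.1 hrect.2.2.2 hr hr2 hc hc2]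
  by_cases h : r = p.1 ∧ c = p.2
  · rw [if_pos h]
    have : (r, c) = p := Prod.ext_iff.mpr ⟨h.1, h.2⟩
    simp [this]
  · rw [if_neg h, hiff r c hr hr2 hc hc2]
    have hne : (r, c) ≠ p := by
      intro hcon
      exact h ⟨congrArg Prod.fst hcon, congrArg Prod.snd hcon⟩
    simp [List.mem_append, hne]

-- per-candidate-list correspondence between A's and the frontier expansion
lemma pvVisit_corr (grid : List (List Int)) (color cols : Int) (cl : List (Int × Int)) :
    ∀ v seen aA aB, pvInv grid cols v seen →
      ∃ add,
        cl.foldl (pvVisitA grid color cols) (v, aA) =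
          ((cl.foldl (pvVisitA grid color cols) (v, aA)).1, aA ++ add) ∧
        cl.foldl (pvVisitB grid color cols) (seen, aB) = (seen ++ add, aB ++ add) ∧
        pvInv grid cols (cl.foldl (pvVisitA grid color cols) (v, aA)).1 (seen ++ add) ∧
        add.Nodup ∧ (∀ p ∈ add, p ∉ seen) ∧
        pvUnvis (grid.length : Int) cols (cl.foldl (pvVisitA grid color cols) (v, aA)).1 +
            add.length ≤ pvUnvis (grid.length : Int) cols v := by
  induction cl with
  | nil =>
    intro v seen aA aB hinv
    exact ⟨[], by simp, by simp, by simpa using hinv, by simp, by simp, by simp⟩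
  | cons p t ih =>
    intro v seen aA aB hinv
    rw [List.foldl_cons, List.foldl_cons]
    by_cases hrect : 0 ≤ p.1 ∧ p.1 < (grid.length : Int) ∧ 0 ≤ p.2 ∧ p.2 < cols
    · by_cases hcol : pvGridAt grid p.1 p.2 = color
      · by_cases hmem : p ∈ seen
        · have hvtrue : pvVget v p.1 p.2 = true :=
            (hinv.2 p.1 p.2 hrect.1 hrect.2.1 hrect.2.2.1 hrect.2.2.2).mpr (by simpa using hmem)
          have hA : pvVisitA grid color cols (v, aA) p = (v, aA) := by
            unfold pvVisitA
            rw [if_pos hrect, if_neg (by simp [hvtrue])]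
          have hB : pvVisitB grid color cols (seen, aB) p = (seen, aB) := by
            unfold pvVisitB
            rw [if_pos hrect, if_neg (by tauto)]
          rw [hA, hB]
          exact ih v seen aA aB hinv
        · have hvfalse : pvVget v p.1 p.2 = false := by
            cases h : pvVget v p.1 p.2
            · rfl
            · exact absurd ((hinv.2 p.1 p.2 hrect.1 hrect.2.1 hrect.2.2.1 hrect.2.2.2).mp h)
                (by simpa using hmem)
          have hA : pvVisitA grid color cols (v, aA) p = (pvVset v p.1 p.2, aA ++ [p]) := by
            unfold pvVisitA
            rw [if_pos hrect, if_pos ⟨hcol, hvfalse⟩]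
          have hB : pvVisitB grid color cols (seen, aB) p = (seen ++ [p], aB ++ [p]) := by
            unfold pvVisitB
            rw [if_pos hrect, if_pos ⟨hcol, hmem⟩]
          rw [hA, hB]
          have hinv' : pvInv grid cols (pvVset v p.1 p.2) (seen ++ [p]) :=
            pvInv_vset _ _ _ _ _ hinv hrect
          obtain ⟨add, h1, h2, h3, h4, h5, h6⟩ :=
            ih (pvVset v p.1 p.2) (seen ++ [p]) (aA ++ [p]) (aB ++ [p]) hinv'
          have hlt := pvUnvis_vset_lt (grid.length : Int) cols v p.1 p.2 hinv.1
            hrect.1 hrect.2.1 hrect.2.2.1 hrect.2.2.2 hvfalse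
          refine ⟨p :: add, ?_, ?_, ?_, ?_, ?_, ?_⟩
          · rw [h1]; simp
          · rw [h2]; simp
          · simpa using h3
          · exact List.nodup_cons.mpr
              ⟨fun hpin => (h5 p hpin) (List.mem_append.mpr (Or.inr List.mem_cons_self)), h4⟩
          · intro x hx
            rcases List.mem_cons.mp hx with rfl | hx'
            · exact hmem
            · exact fun hxs => (h5 x hx') (List.mem_append.mpr (Or.inl hxs))
          · simp only [List.length_cons]
            omega
      · have hA : pvVisitA grid color cols (v, aA) p = (v, aA) := by
          unfold pvVisitA
          rw [if_pos hrect, if_neg (fun h => hcol h.1)]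
        have hB : pvVisitB grid color cols (seen, aB) p = (seen, aB) := by
          unfold pvVisitB
          rw [if_pos hrect, if_neg (fun h => hcol h.1)]
        rw [hA, hB]
        exact ih v seen aA aB hinv
    · have hA : pvVisitA grid color cols (v, aA) p = (v, aA) := by
        unfold pvVisitA
        rw [if_neg hrect]
      have hB : pvVisitB grid color cols (seen, aB) p = (seen, aB) := by
        unfold pvVisitB
        rw [if_neg hrect]
      rw [hA, hB]
      exact ih v seen aA aB hinv

-- one whole frontier: A's expansion versus the frontier scan
lemma pvExp_corr (grid : List (List Int)) (color cols : Int) (q : List (Int × Int)) :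
    ∀ v seen nf comp, pvInv grid cols v seen →
      q.foldl (pvStepB grid color cols) (seen, nf, comp) =
        ((seen ++ (pvExpA grid color cols (v, []) q).2,
          nf ++ (pvExpA grid color cols (v, []) q).2,
          comp ++ (pvExpA grid color cols (v, []) q).2)) ∧
      pvInv grid cols (pvExpA grid color cols (v, []) q).1
        (seen ++ (pvExpA grid color cols (v, []) q).2) ∧
      (pvExpA grid color cols (v, []) q).2.Nodup ∧
      (∀ p ∈ (pvExpA grid color cols (v, []) q).2, p ∉ seen) ∧
      pvUnvis (grid.length : Int) cols (pvExpA grid color cols (v, []) q).1 +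
          (pvExpA grid color cols (v, []) q).2.length ≤
        pvUnvis (grid.length : Int) cols v := by
  induction q with
  | nil =>
    intro v seen nf comp hinv
    exact ⟨by simp [pvExpA], by simpa [pvExpA] using hinv, by simp [pvExpA],
      by simp [pvExpA], by simp [pvExpA]⟩
  | cons cur t ih =>
    intro v seen nf comp hinv
    obtain ⟨add1, a1, b1, hinv1, n1, f1, u1⟩ :=
      pvVisit_corr grid color cols (pvNbrs cur) v seen [] [] hinv
    rcases hWA : (pvNbrs cur).foldl (pvVisitA grid color cols) (v, []) with ⟨v1, d1⟩
    rw [hWA] at a1 hinv1 u1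
    have hd1 : d1 = add1 := by simpa using congrArg Prod.snd a1
    subst hd1
    dsimp only at hinv1 u1
    have hE : pvExpA grid color cols (v, []) (cur :: t) =
        ((pvExpA grid color cols (v1, []) t).1,
          d1 ++ (pvExpA grid color cols (v1, []) t).2) := by
      have hsh := pvShiftExpA grid color cols t v1 d1
      simp only [pvExpA, List.foldl_cons] at hsh ⊢
      rw [hWA]
      exact hsh
    rw [hE]
    rw [List.foldl_cons, pvStepB_decomp, pvCellB_fold, b1]
    dsimp only
    simp only [List.nil_append]
    obtain ⟨hB2, hinv2, n2, f2, u2⟩ := ih v1 (seen ++ d1) (nf ++ d1) (comp ++ d1) hinv1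
    refine ⟨?_, ?_, ?_, ?_, ?_⟩
    · rw [hB2]
      simp [List.append_assoc]
    · simpa [List.append_assoc] using hinv2
    · rw [List.nodup_append]
      exact ⟨n1, n2, fun p hp1 b hb2 heq =>
        (f2 b hb2) (List.mem_append.mpr (Or.inr (heq ▸ hp1)))⟩
    · intro x hx
      rcases List.mem_append.mp hx with h | h
      · exact f1 x h
      · exact fun hxs => (f2 x h) (List.mem_append.mpr (Or.inl hxs))
    · simp only [List.length_append]
      omega

lemma pvBfsA_congr (grid : List (List Int)) (color cols : Int)
    (v v' : List (List Bool)) (q q' c c' : List (Int × Int))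
    (hv : pvShape (grid.length : Int) cols v) (hv' : pvShape (grid.length : Int) cols v')
    (h1 : v = v') (h2 : q = q') (h3 : c = c') :
    (pvBfsA grid color (grid.length : Int) cols v q c hv).1 =
      (pvBfsA grid color (grid.length : Int) cols v' q' c' hv').1 := by
  subst h1; subst h2; subst h3; rfl

-- A's queue BFS advances by whole levels
lemma pvBfsA_level (grid : List (List Int)) (color cols : Int) (q1 : List (Int × Int)) :
    ∀ q2 v comp (hv : pvShape (grid.length : Int) cols v)
      (hv' : pvShape (grid.length : Int) cols (pvExpA grid color cols (v, []) q1).1),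
      (pvBfsA grid color (grid.length : Int) cols v (q1 ++ q2) comp hv).1 =
        (pvBfsA grid color (grid.length : Int) cols (pvExpA grid color cols (v, []) q1).1
          (q2 ++ (pvExpA grid color cols (v, []) q1).2)
          (PySem.Set.update comp (pvExpA grid color cols (v, []) q1).2) hv').1 := by
  induction q1 with
  | nil =>
    intro q2 v comp hv hv'
    simp only [pvExpA, List.foldl_nil, List.nil_append, List.append_nil, PySem.Set.update_nil]
  | cons cur q1' ih =>
    intro q2 v comp hv hv'
    rcases hW : (pvNbrs cur).foldl (pvVisitA grid color cols) (v, []) with ⟨v1, d⟩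
    have hstep : pvStepA grid color (grid.length : Int) cols (v, q1' ++ q2, comp) cur =
        (v1, (q1' ++ q2) ++ d, PySem.Set.update comp d) := by
      rw [pvStepA_decomp, pvCellA_fold, hW]
    have hsh1 : pvShape (grid.length : Int) cols v1 := by
      have h := (pvStepA_inv grid color (grid.length : Int) cols cur (v, q1' ++ q2, comp) hv).1
      rw [hstep] at h
      exact h
    have hE : pvExpA grid color cols (v, []) (cur :: q1') =
        ((pvExpA grid color cols (v1, []) q1').1,
          d ++ (pvExpA grid color cols (v1, []) q1').2) := by
      have hsh := pvShiftExpA grid color cols q1' v1 d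
      simp only [pvExpA, List.foldl_cons] at hsh ⊢
      rw [hW]
      exact hsh
    have hv2 : pvShape (grid.length : Int) cols (pvExpA grid color cols (v1, []) q1').1 := by
      have h := hv'
      rw [hE] at h
      exact h
    rw [List.cons_append, pvBfsA]
    rw [pvBfsA_congr grid color cols _ v1 _ (q1' ++ (q2 ++ d)) _ (PySem.Set.update comp d) _ hsh1
      (by rw [hstep]) (by rw [hstep, List.append_assoc]) (by rw [hstep])]
    rw [ih (q2 ++ d) v1 (PySem.Set.update comp d) hsh1 hv2]
    refine pvBfsA_congr grid color cols _ _ _ _ _ _ hv2 hv' ?_ ?_ ?_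
    · rw [hE]
    · rw [hE, ← List.append_assoc]
    · rw [hE, PySem.Set.update_append]

-- the BFS loops of A and the frontier form agree
lemma pvLVL (grid : List (List Int)) (color cols : Int) :
    ∀ (n : Nat) (v : List (List Bool)) (seen q comp : List (Int × Int))
      (hv : pvShape (grid.length : Int) cols v),
      pvUnvis (grid.length : Int) cols v = n →
      pvInv grid cols v seen → (∀ p ∈ comp, p ∈ seen) → comp.Nodup →
      (pvBfsA grid color (grid.length : Int) cols v q comp hv).1.2 =
          (pvBfsB grid color cols seen q comp).2 ∧
        (pvBfsB grid color cols seen q comp).2.Nodup ∧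
        pvInv grid cols (pvBfsA grid color (grid.length : Int) cols v q comp hv).1.1
          (pvBfsB grid color cols seen q comp).1 := by
  intro n
  induction n using Nat.strong_induction_on with
  | _ n IH =>
    intro v seen q comp hv hn hinv hsub hnd
    rcases q with _ | ⟨c0, qt⟩
    · rw [pvBfsA, pvBfsB]
      exact ⟨rfl, hnd, hinv⟩
    · have hq : (c0 :: qt : List (Int × Int)) ≠ [] := by simp
      obtain ⟨hB, hinv2, n2, f2, u2⟩ := pvExp_corr grid color cols (c0 :: qt) v seen [] comp hinv
      have hvE : pvShape (grid.length : Int) cols (pvExpA grid color cols (v, []) (c0 :: qt)).1 :=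
        hinv2.1
      have hA := pvBfsA_level grid color cols (c0 :: qt) [] v comp hv hvE
      rw [List.append_nil] at hA
      simp only [List.nil_append] at hA
      have hupd : PySem.Set.update comp (pvExpA grid color cols (v, []) (c0 :: qt)).2 =
          comp ++ (pvExpA grid color cols (v, []) (c0 :: qt)).2 :=
        PySem.Set.update_eq_append_of_disjoint _ _ n2
          (fun x hx hxc => (f2 x hx) (hsub x hxc))
      rw [hupd] at hA
      rw [pvBfsB, dif_neg hq, hB]
      dsimp only
      simp only [List.nil_append]
      rw [hA]
      by_cases hEnil : (pvExpA grid color cols (v, []) (c0 :: qt)).2 = []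
      · rw [hEnil]
        rw [pvBfsA, pvBfsB]
        simp only [List.append_nil]
        refine ⟨rfl, hnd, ?_⟩
        have := hinv2
        rw [hEnil] at this
        simpa using this
      · have hlt : pvUnvis (grid.length : Int) cols (pvExpA grid color cols (v, []) (c0 :: qt)).1 < n := by
          have hlen : (pvExpA grid color cols (v, []) (c0 :: qt)).2.length ≠ 0 := by
            simpa [List.length_eq_zero_iff] using hEnil
          omega
        refine IH _ hlt (pvExpA grid color cols (v, []) (c0 :: qt)).1
          (seen ++ (pvExpA grid color cols (v, []) (c0 :: qt)).2)
          (pvExpA grid color cols (v, []) (c0 :: qt)).2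
          (comp ++ (pvExpA grid color cols (v, []) (c0 :: qt)).2) hvE rfl hinv2 ?_ ?_
        · intro p hp
          rcases List.mem_append.mp hp with h | h
          · exact List.mem_append.mpr (Or.inl (hsub p h))
          · exact List.mem_append.mpr (Or.inr h)
        · rw [List.nodup_append]
          exact ⟨hnd, n2, fun p hp1 b hb2 heq => (f2 b hb2) (hsub b (heq ▸ hp1))⟩

-- a fold preserves a binary relation between two state spaces
lemma pvFoldl_rel {α β γ : Type} (R : α → β → Prop) (f : α → γ → α) (g : β → γ → β)
    (l : List γ) : ∀ a b, R a b → (∀ x ∈ l, ∀ a b, R a b → R (f a x) (g b x)) →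
      R (l.foldl f a) (l.foldl g b) := by
  induction l with
  | nil => exact fun a b h _ => h
  | cons x t ih =>
    intro a b h hstep
    exact ih _ _ (hstep x List.mem_cons_self a b h)
      (fun y hy => hstep y (List.mem_cons_of_mem _ hy))

lemma pvInv_init (grid : List (List Int)) (cols : Int) (hc : 0 ≤ cols) :
    pvInv grid cols
      ((PySem.List.pyRange 0 (grid.length : Int) 1).map
        (fun _ => (PySem.List.pyRange 0 cols 1).map (fun _ => false))) [] := by
  refine ⟨pvShape_v0 (grid.length : Int) cols (by positivity) hc, ?_⟩
  intro r c hr hr2 hc' hc2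
  have h1 : PySem.List.pyGetD
      ((PySem.List.pyRange 0 (grid.length : Int) 1).map
        (fun _ => (PySem.List.pyRange 0 cols 1).map (fun _ => false))) r [] =
      (PySem.List.pyRange 0 cols 1).map (fun _ => false) :=
    PySem.List.pyGetD_map_pyRange_of_nonneg _ _ _ _ hr hr2
  have h2 : PySem.List.pyGetD ((PySem.List.pyRange 0 cols 1).map (fun _ => false)) c false
      = false := PySem.List.pyGetD_map_pyRange_of_nonneg (fun _ => false) cols c false hc' hc2
  rw [pvVget, h1, h2]
  simp

-- A's port equals the frontier form
lemma pvA_eq_front (grid : List (List Int)) (color : Int) :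
    find_connected_all_directions_by_color grid color =
      (pvFrontOuter grid color
        (if (grid.length : Int) > 0 then ((PySem.List.pyGetD grid 0 []).length : Int) else 0)).2 := by
  unfold find_connected_all_directions_by_color pvFrontOuter
  dsimp only
  set cols : Int := if (grid.length : Int) > 0 then ((PySem.List.pyGetD grid 0 []).length : Int) else 0 with hcols
  have hc : (0 : Int) ≤ cols := by
    rw [hcols]; split <;> simp
  refine (pvFoldl_rel
    (fun (a : {p : List (List Bool) × List (List (Int × Int)) // pvShape ((grid.length : Int)) cols p.1})
         (b : List (Int × Int) × List (List (Int × Int))) =>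
      pvInv grid cols a.1.1 b.1 ∧ a.1.2 = b.2)
    _ _ _ _ _
    ⟨pvInv_init grid cols hc, rfl⟩
    ?_).2
  intro r hr a b hR
  rw [PySem.List.mem_pyRange_one] at hr
  refine pvFoldl_rel
    (fun (a : {p : List (List Bool) × List (List (Int × Int)) // pvShape ((grid.length : Int)) cols p.1})
         (b : List (Int × Int) × List (List (Int × Int))) =>
      pvInv grid cols a.1.1 b.1 ∧ a.1.2 = b.2)
    _ _ (PySem.List.pyRange 0 cols 1) a b hR ?_
  intro c hcm a b hR
  rw [PySem.List.mem_pyRange_one] at hcm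
  obtain ⟨hinv, hcomps⟩ := hR
  have hiff := hinv.2 r c hr.1 hr.2 hcm.1 hcm.2
  by_cases hfire : pvGridAt grid r c = color ∧ (r, c) ∉ b.1
  · have hvfalse : pvVget a.1.1 r c = false := by
      cases h : pvVget a.1.1 r c
      · rfl
      · exact absurd (hiff.mp h) hfire.2
    rw [if_pos ⟨hfire.1, hvfalse⟩, if_pos hfire]
    have hseen' : PySem.Set.add b.1 (r, c) = b.1 ++ [(r, c)] := PySem.Set.add_of_not_mem hfire.2
    have hinv' : pvInv grid cols (pvVset a.1.1 r c) (b.1 ++ [(r, c)]) :=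
      pvInv_vset grid cols a.1.1 b.1 (r, c) hinv ⟨hr.1, hr.2, hcm.1, hcm.2⟩
    have hlvl := pvLVL grid color cols
      (pvUnvis (grid.length : Int) cols (pvVset a.1.1 r c))
      (pvVset a.1.1 r c) (b.1 ++ [(r, c)]) [(r, c)] [(r, c)]
      (pvShape_vset (grid.length : Int) cols a.1.1 r c hinv.1) rfl hinv'
      (by
        intro p hp
        rw [List.mem_singleton] at hp
        subst hp
        exact List.mem_append.mpr (Or.inr List.mem_cons_self))
      (by simp)
    rw [hseen']
    have hx : (pvBfsA grid color (grid.length : Int) cols (pvVset a.1.1 r c) [(r, c)] [(r, c)]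
        (pvShape_vset (grid.length : Int) cols a.1.1 r c hinv.1)).1.2 =
        (pvBfsB grid color cols (b.1 ++ [(r, c)]) [(r, c)] [(r, c)]).2 := hlvl.1
    exact ⟨hlvl.2.2, by rw [hcomps]; exact congrArg (fun x => b.2 ++ [pvSort x]) hx⟩
  · have hskipA : ¬(pvGridAt grid r c = color ∧ pvVget a.1.1 r c = false) := by
      intro h
      exact hfire ⟨h.1, fun hmem => by rw [hiff.mpr hmem] at h; exact absurd h.2 (by simp)⟩
    rw [if_neg hskipA, if_neg hfire]
    exact ⟨hinv, hcomps⟩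


-- ---------- membership characterization of one frontier level ----------
lemma pvVisitB_char (grid : List (List Int)) (color cols : Int) (cl : List (Int × Int)) :
    ∀ seen acc : List (Int × Int), ∃ add,
      cl.foldl (pvVisitB grid color cols) (seen, acc) = (seen ++ add, acc ++ add) ∧
      add.Nodup ∧
      ∀ q, q ∈ add ↔ (q ∈ pvMset grid color cols ∧ q ∉ seen ∧ q ∈ cl) := by
  induction cl with
  | nil => intro seen acc; exact ⟨[], by simp, by simp, by simp⟩
  | cons p t ih =>
    intro seen acc
    rw [List.foldl_cons]
    by_cases hfire : p ∈ pvMset grid color cols ∧ p ∉ seen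
    · have hm := (pvMem_Mset grid color cols p).mp hfire.1
      have hstep : pvVisitB grid color cols (seen, acc) p = (seen ++ [p], acc ++ [p]) := by
        unfold pvVisitB
        rw [if_pos ⟨hm.1, hm.2.1, hm.2.2.1, hm.2.2.2.1⟩, if_pos ⟨hm.2.2.2.2, hfire.2⟩]
      rw [hstep]
      obtain ⟨add, heq, hnd, hmem⟩ := ih (seen ++ [p]) (acc ++ [p])
      refine ⟨p :: add, by rw [heq]; simp, ?_, ?_⟩
      · exact List.nodup_cons.mpr ⟨fun hin => ((hmem p).mp hin).2.1 (by simp), hnd⟩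
      · intro q
        rw [List.mem_cons, hmem q]
        constructor
        · rintro (rfl | ⟨h1, h2, h3⟩)
          · exact ⟨hfire.1, hfire.2, List.mem_cons_self⟩
          · exact ⟨h1, fun hq => h2 (by simp [hq]), List.mem_cons_of_mem _ h3⟩
        · rintro ⟨h1, h2, h3⟩
          by_cases hqp : q = p
          · exact Or.inl hqp
          · refine Or.inr ⟨h1, by simp [h2, hqp], ?_⟩
            rcases List.mem_cons.mp h3 with h | h
            exacts [absurd h hqp, h]
    · have hstep : pvVisitB grid color cols (seen, acc) p = (seen, acc) := by
        unfold pvVisitB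
        by_cases hb : 0 ≤ p.1 ∧ p.1 < (grid.length : Int) ∧ 0 ≤ p.2 ∧ p.2 < cols
        · rw [if_pos hb, if_neg ?_]
          rw [pvMem_Mset] at hfire
          tauto
        · rw [if_neg hb]
      rw [hstep]
      obtain ⟨add, heq, hnd, hmem⟩ := ih seen acc
      refine ⟨add, heq, hnd, fun q => ?_⟩
      rw [hmem q]
      constructor
      · rintro ⟨h1, h2, h3⟩; exact ⟨h1, h2, List.mem_cons_of_mem _ h3⟩
      · rintro ⟨h1, h2, h3⟩
        rcases List.mem_cons.mp h3 with rfl | h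
        · exact absurd ⟨h1, h2⟩ hfire
        · exact ⟨h1, h2, h⟩

lemma pvFrontLevel_char (grid : List (List Int)) (color cols : Int) (F : List (Int × Int)) :
    ∀ seen nf comp : List (Int × Int), ∃ add,
      F.foldl (pvStepB grid color cols) (seen, nf, comp) =
        (seen ++ add, nf ++ add, comp ++ add) ∧
      add.Nodup ∧
      ∀ q, q ∈ add ↔ (q ∈ pvMset grid color cols ∧ q ∉ seen ∧ ∃ f ∈ F, pvAdj f q) := by
  induction F with
  | nil => intro seen nf comp; exact ⟨[], by simp, by simp, by simp⟩
  | cons f t ih =>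
    intro seen nf comp
    rw [List.foldl_cons, pvStepB_decomp, pvCellB_fold]
    obtain ⟨d, heq, hnd, hmem⟩ := pvVisitB_char grid color cols (pvNbrs f) seen []
    rw [heq]
    dsimp only
    obtain ⟨add2, heq2, hnd2, hmem2⟩ := ih (seen ++ d) (nf ++ d) (comp ++ d)
    refine ⟨d ++ add2, by
      simp only [List.nil_append]
      rw [heq2]
      simp [List.append_assoc], ?_, ?_⟩
    · rw [List.nodup_append]
      refine ⟨hnd, hnd2, fun q hq1 b hb2 heqb => ?_⟩
      subst heqb
      exact ((hmem2 q).mp hb2).2.1 (List.mem_append.mpr (Or.inr hq1))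
    · intro q
      rw [List.mem_append, hmem q, hmem2 q]
      constructor
      · rintro (⟨h1, h2, h3⟩ | ⟨h1, h2, h3⟩)
        · exact ⟨h1, h2, f, List.mem_cons_self, (pvMem_nbrs f q).mp h3⟩
        · obtain ⟨f', hf', hadj⟩ := h3
          exact ⟨h1, fun hq => h2 (List.mem_append.mpr (Or.inl hq)),
            f', List.mem_cons_of_mem _ hf', hadj⟩
      · rintro ⟨h1, h2, f', hf', hadj⟩
        rcases List.mem_cons.mp hf' with rfl | hft
        · exact Or.inl ⟨h1, h2, (pvMem_nbrs f' q).mpr hadj⟩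
        · by_cases hqd : q ∈ d
          · exact Or.inl ((hmem q).mp hqd)
          · exact Or.inr ⟨h1, by simp [h2, hqd], f', hft, hadj⟩

-- closure argument: a fully closed collected set contains the whole class
lemma pvClass_sub (grid : List (List Int)) (color cols : Int) (s : Int × Int)
    (seen0 L : List (Int × Int))
    (hseen0 : ∀ q, pvReach (pvMset grid color cols) s q → q ∉ seen0)
    (hsL : s ∈ L)
    (hclosed : ∀ x ∈ L, ∀ q ∈ pvMset grid color cols, pvAdj x q → q ∈ seen0 ++ L) :
    ∀ q, pvReach (pvMset grid color cols) s q → q ∈ L := by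
  intro q hq
  induction hq with
  | refl => exact hsL
  | @tail b q hr hstep ih =>
    have hmem := hclosed b ih q hstep.1 hstep.2
    rcases List.mem_append.mp hmem with h | h
    · exact absurd h (hseen0 q (hr.tail hstep))
    · exact h

-- full correctness of the frontier loop: it collects exactly the class of its seed
lemma pvBfsB_corr (grid : List (List Int)) (color cols : Int) (s : Int × Int)
    (hs : s ∈ pvMset grid color cols) :
    ∀ (n : Nat) (seen0 L F comp0 : List (Int × Int)),
      pvMuB grid cols (seen0 ++ L) = n →
      (∀ q, pvReach (pvMset grid color cols) s q → q ∉ seen0) →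
      (∀ x ∈ L, pvReach (pvMset grid color cols) s x) →
      L.Nodup →
      (∀ f ∈ F, f ∈ L) →
      s ∈ L →
      (∀ x ∈ L, x ∉ F → ∀ q ∈ pvMset grid color cols, pvAdj x q → q ∈ seen0 ++ L) →
      ∃ L', pvBfsB grid color cols (seen0 ++ L) F (comp0 ++ L) = (seen0 ++ L', comp0 ++ L') ∧
        L'.Nodup ∧ (∀ q, q ∈ L' ↔ pvReach (pvMset grid color cols) s q) := by
  intro n
  induction n using Nat.strong_induction_on with
  | _ n IH =>
    intro seen0 L F comp0 hn hseen0 hL hLnd hF hsL hclosed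
    rcases hFnil : F with _ | ⟨f0, Ft⟩
    · subst hFnil
      rw [pvBfsB, dif_pos rfl]
      refine ⟨L, rfl, hLnd, fun q => ⟨hL q, ?_⟩⟩
      exact fun hq => pvClass_sub grid color cols s seen0 L hseen0 hsL
        (fun x hx => hclosed x hx (by simp)) q hq
    · subst hFnil
      rw [pvBfsB, dif_neg (by simp)]
      obtain ⟨add, heq, hadnd, hadmem⟩ :=
        pvFrontLevel_char grid color cols (f0 :: Ft) (seen0 ++ L) [] (comp0 ++ L)
      simp only [List.nil_append, List.append_nil] at heq
      rw [heq]
      dsimp only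
      by_cases haddnil : add = []
      · subst haddnil
        simp only [List.append_nil]
        rw [pvBfsB, dif_pos rfl]
        refine ⟨L, rfl, hLnd, fun q => ⟨hL q, ?_⟩⟩
        refine fun hq => pvClass_sub grid color cols s seen0 L hseen0 hsL ?_ q hq
        intro x hx q' hq' hadj
        by_cases hxF : x ∈ (f0 :: Ft : List (Int × Int))
        · by_cases hq's : q' ∈ seen0 ++ L
          · exact hq's
          · exact absurd ((hadmem q').mpr ⟨hq', hq's, x, hxF, hadj⟩) (by simp)
        · exact hclosed x hx hxF q' hq' hadj
      · have hfresh : ∀ p ∈ add, p ∉ seen0 ++ L ∧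
            (0 ≤ p.1 ∧ p.1 < (grid.length : Int) ∧ 0 ≤ p.2 ∧ p.2 < cols) := by
          intro p hp
          have h := (hadmem p).mp hp
          have hb := (pvMem_Mset grid color cols p).mp h.1
          exact ⟨h.2.1, hb.1, hb.2.1, hb.2.2.1, hb.2.2.2.1⟩
        have hlt : pvMuB grid cols ((seen0 ++ L) ++ add) < n :=
          hn ▸ pvMuB_append_lt grid cols (seen0 ++ L) add hfresh haddnil
        have hLadd : ∀ x ∈ L ++ add, pvReach (pvMset grid color cols) s x := by
          intro x hx
          rcases List.mem_append.mp hx with h | h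
          · exact hL x h
          · obtain ⟨hxM, _, f, hfF, hadj⟩ := (hadmem x).mp h
            exact (hL f (hF f hfF)).tail ⟨hxM, hadj⟩
        have hres := IH _ hlt seen0 (L ++ add) add comp0
          (by rw [← List.append_assoc])
          hseen0 hLadd
          (by
            rw [List.nodup_append]
            exact ⟨hLnd, hadnd, fun p hp b hb heqb =>
              ((hadmem b).mp hb).2.1 (List.mem_append.mpr (Or.inr (heqb ▸ hp)))⟩)
          (fun f hf => List.mem_append.mpr (Or.inr hf))
          (List.mem_append.mpr (Or.inl hsL))
          ?_
        · obtain ⟨L', h1, h2, h3⟩ := hres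
          refine ⟨L', ?_, h2, h3⟩
          simpa [List.append_assoc] using h1
        · intro x hx hxadd q hq hadj
          rcases List.mem_append.mp hx with hxL | hxa
          · by_cases hxF : x ∈ (f0 :: Ft : List (Int × Int))
            · by_cases hqs : q ∈ seen0 ++ L
              · rw [List.append_assoc] at *
                rcases List.mem_append.mp hqs with h | h
                · exact List.mem_append.mpr (Or.inl h)
                · exact List.mem_append.mpr (Or.inr (List.mem_append.mpr (Or.inl h)))
              · have : q ∈ add := (hadmem q).mpr ⟨hq, hqs, x, hxF, hadj⟩
                exact List.mem_append.mpr (Or.inr (List.mem_append.mpr (Or.inr this)))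
            · have := hclosed x hxL hxF q hq hadj
              rcases List.mem_append.mp this with h | h
              · exact List.mem_append.mpr (Or.inl h)
              · exact List.mem_append.mpr (Or.inr (List.mem_append.mpr (Or.inl h)))
          · exact absurd hxa hxadd


-- ---------- the outer scan as a fold over the matching cells ----------
def pvFrontCell (grid : List (List Int)) (color cols : Int)
    (st : List (Int × Int) × List (List (Int × Int))) (p : Int × Int) :
    List (Int × Int) × List (List (Int × Int)) :=
  if p ∉ st.1 then
    (let res := pvBfsB grid color cols (PySem.Set.add st.1 p) [p] [p]
     (res.1, st.2 ++ [pvSort res.2]))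
  else st

lemma pvFrontOuter_eq_fold (grid : List (List Int)) (color cols : Int) :
    pvFrontOuter grid color cols =
      (pvMset grid color cols).foldl (pvFrontCell grid color cols) ([], []) := by
  unfold pvMset
  rw [List.foldl_filter]
  unfold pvRectL
  rw [List.foldl_flatMap]
  unfold pvFrontOuter
  congr 1
  funext st r
  rw [List.foldl_map]
  congr 1
  funext st c
  unfold pvFrontCell
  split_ifs <;> first | rfl | (exfalso; simp_all)

-- the invariant of the outer scan over a processed prefix P
def pvFrontInv (grid : List (List Int)) (color cols : Int) (P : List (Int × Int))
    (st : List (Int × Int) × List (List (Int × Int))) : Prop :=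
  (∀ q, q ∈ st.1 ↔
    (q ∈ pvMset grid color cols ∧ ∃ a ∈ P, pvReach (pvMset grid color cols) a q)) ∧
  st.2 = (P.filter (fun s =>
      @decide _ (Classical.propDecidable (pvIsSeed (pvMset grid color cols) s)))).map
    (pvClassL (pvMset grid color cols))

lemma pvFrontCell_inv (grid : List (List Int)) (color cols : Int)
    (P R : List (Int × Int)) (p : Int × Int)
    (hsplit : pvMset grid color cols = P ++ p :: R)
    (st : List (Int × Int) × List (List (Int × Int)))
    (hinv : pvFrontInv grid color cols P st) :
    pvFrontInv grid color cols (P ++ [p]) (pvFrontCell grid color cols st p) := by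
  have hMpw := pvMset_pairwise grid color cols
  have hMnd := pvMset_nodup grid color cols
  have hpM : p ∈ pvMset grid color cols := by rw [hsplit]; simp
  have hPM : ∀ a ∈ P, a ∈ pvMset grid color cols := by
    intro a ha; rw [hsplit]; exact List.mem_append.mpr (Or.inl ha)
  have hpP : p ∉ P := by
    rw [hsplit] at hMnd
    have := List.disjoint_of_nodup_append hMnd
    exact fun hp => this hp List.mem_cons_self
  have hPlt : ∀ a ∈ P, pvRmLt a p := by
    intro a ha
    rw [hsplit] at hMpw
    exact (List.pairwise_append.mp hMpw).2.2 a ha p List.mem_cons_self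
  obtain ⟨hseen, hcomps⟩ := hinv
  by_cases hfire : p ∉ st.1
  · -- p is unseen: it is a seed, and the BFS collects its whole class
    have hseed : pvIsSeed (pvMset grid color cols) p := by
      intro q hq hreach
      rcases pvRmLe_total p q with h | h
      · exact h
      · by_cases hqp : q = p
        · subst hqp; exact pvRmLe_refl q
        · exfalso
          have hqP : q ∈ P := by
            have hq' : q ∈ P ++ p :: R := hsplit ▸ hq
            rcases List.mem_append.mp hq' with h' | h'
            · exact h'
            · rcases List.mem_cons.mp h' with h'' | h''
              · exact absurd h'' hqp
              · exfalso
                rw [hsplit] at hMpw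
                have := (List.pairwise_append.mp hMpw).2.1
                have hlt := (List.pairwise_cons.mp this).1 q h''
                exact pvRmLt_not_le hlt h
          exact hfire (hseen p |>.mpr ⟨hpM, q, hqP, pvReach_symm hpM hreach⟩)
    have hseen0 : ∀ q, pvReach (pvMset grid color cols) p q → q ∉ st.1 := by
      intro q hq hqs
      obtain ⟨hqM, a, haP, hreach⟩ := (hseen q).mp hqs
      exact hfire ((hseen p).mpr ⟨hpM, a, haP,
        hreach.trans (pvReach_symm hpM hq)⟩)
    obtain ⟨L', hres, hL'nd, hL'mem⟩ := pvBfsB_corr grid color cols p hpM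
      (pvMuB grid cols (st.1 ++ [p])) st.1 [p] [p] [] rfl hseen0
      (fun x hx => by rw [List.mem_singleton] at hx; subst hx; exact pvReach_refl _ _)
      (by simp) (fun f hf => hf) List.mem_cons_self
      (fun x hx hnx => absurd hx hnx)
    simp only [List.nil_append] at hres
    unfold pvFrontCell
    rw [if_pos hfire]
    dsimp only
    rw [PySem.Set.add_of_not_mem hfire, hres]
    constructor
    · intro q
      dsimp only
      rw [List.mem_append, hseen q, hL'mem q]
      constructor
      · rintro (⟨hqM, a, ha, hr⟩ | hr)
        · exact ⟨hqM, a, List.mem_append.mpr (Or.inl ha), hr⟩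
        · exact ⟨pvReach_mem hpM hr, p, List.mem_append.mpr (Or.inr (List.mem_singleton_self _)), hr⟩
      · rintro ⟨hqM, a, ha, hr⟩
        rcases List.mem_append.mp ha with h | h
        · exact Or.inl ⟨hqM, a, h, hr⟩
        · rw [List.mem_singleton] at h
          subst h
          exact Or.inr hr
    · dsimp only
      rw [hcomps, List.filter_append, List.map_append]
      congr 1
      have hfilterp : List.filter (fun s =>
          @decide _ (Classical.propDecidable (pvIsSeed (pvMset grid color cols) s))) [p] = [p] := by
        simp only [List.filter_cons, List.filter_nil]
        rw [if_pos (by simpa using hseed)]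
      rw [hfilterp, List.map_cons, List.map_nil]
      congr 1
      refine pvSort_eq hL'nd (pvClassL_pairwise hMpw p) (fun x => ?_)
      rw [hL'mem x, pvMem_classL]
      exact ⟨fun h => ⟨pvReach_mem hpM h, h⟩, fun h => h.2⟩
  · -- p was already seen: not a seed, nothing changes
    rw [not_not] at hfire
    obtain ⟨hpM', a, haP, hreach⟩ := (hseen p).mp hfire
    have hnseed : ¬ pvIsSeed (pvMset grid color cols) p := by
      intro hseed
      have := hseed a (hPM a haP) (pvReach_symm (hPM a haP) hreach)
      exact pvRmLt_not_le (hPlt a haP) this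
    unfold pvFrontCell
    rw [if_neg (by simpa using hfire)]
    constructor
    · intro q
      rw [hseen q]
      constructor
      · rintro ⟨hqM, b, hb, hr⟩
        exact ⟨hqM, b, List.mem_append.mpr (Or.inl hb), hr⟩
      · rintro ⟨hqM, b, hb, hr⟩
        rcases List.mem_append.mp hb with h | h
        · exact ⟨hqM, b, h, hr⟩
        · rw [List.mem_singleton] at h
          subst h
          exact ⟨hqM, a, haP, hreach.trans hr⟩
    · rw [hcomps, List.filter_append, List.map_append]
      have hfilterp : List.filter (fun s =>
          @decide _ (Classical.propDecidable (pvIsSeed (pvMset grid color cols) s))) [p] = [] := by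
        simp only [List.filter_cons, List.filter_nil]
        rw [if_neg (by simpa using hnseed)]
      rw [hfilterp]
      simp

lemma pvFront_fold_inv (grid : List (List Int)) (color cols : Int) :
    ∀ (R P : List (Int × Int)) (st : List (Int × Int) × List (List (Int × Int))),
      pvMset grid color cols = P ++ R →
      pvFrontInv grid color cols P st →
      pvFrontInv grid color cols (pvMset grid color cols)
        (R.foldl (pvFrontCell grid color cols) st) := by
  intro R
  induction R with
  | nil =>
    intro P st hsplit hinv
    rw [List.foldl_nil]
    rw [List.append_nil] at hsplit
    rw [hsplit]
    exact hinv
  | cons p R' ih =>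
    intro P st hsplit hinv
    rw [List.foldl_cons]
    refine ih (P ++ [p]) _ (by rw [hsplit, List.append_assoc]; rfl) ?_
    exact pvFrontCell_inv grid color cols P R' p hsplit st hinv

lemma pvFront_eq_canon (grid : List (List Int)) (color cols : Int) :
    (pvFrontOuter grid color cols).2 = pvCanon (pvMset grid color cols) := by
  rw [pvFrontOuter_eq_fold]
  have h := pvFront_fold_inv grid color cols (pvMset grid color cols) [] ([], [])
    rfl ⟨by simp, by simp⟩
  exact h.2


-- ---------- class minima ----------
def pvIsMin (P : List (Int × Int)) (q m : Int × Int) : Prop :=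
  m ∈ P ∧ pvReach P q m ∧ ∀ x ∈ P, pvReach P q x → pvRmLe m x

lemma pvIsMin_unique {P : List (Int × Int)} {q m m' : Int × Int}
    (h : pvIsMin P q m) (h' : pvIsMin P q m') : m = m' :=
  pvRmLe_antisymm (h.2.2 m' h'.1 h'.2.1) (h'.2.2 m h.1 h.2.1)

lemma pvIsMin_transfer {P : List (Int × Int)} {q x m : Int × Int} (hq : q ∈ P)
    (hx : pvReach P q x) (hm : pvIsMin P q m) : pvIsMin P x m :=
  ⟨hm.1, (pvReach_symm hq hx).trans hm.2.1,
    fun y hy hr => hm.2.2 y hy (hx.trans hr)⟩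

lemma pvIsMin_self {P : List (Int × Int)} {q m : Int × Int} (hq : q ∈ P)
    (hm : pvIsMin P q m) : pvIsMin P m m :=
  pvIsMin_transfer hq hm.2.1 hm

lemma pvIsMin_exists {P : List (Int × Int)} (hpw : List.Pairwise pvRmLt P)
    {q : Int × Int} (hq : q ∈ P) : ∃ m, pvIsMin P q m := by
  have hL := List.Pairwise.filter
    (fun x => @decide _ (Classical.propDecidable (pvReach P q x))) hpw
  rcases hF : P.filter (fun x => @decide _ (Classical.propDecidable (pvReach P q x))) with
    _ | ⟨m, t⟩
  · exfalso
    have : q ∈ P.filter (fun x => @decide _ (Classical.propDecidable (pvReach P q x))) := by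
      rw [List.mem_filter]
      exact ⟨hq, by simp [pvReach_refl]⟩
    rw [hF] at this
    exact absurd this (List.not_mem_nil)
  · have hmem : ∀ x, x ∈ m :: t ↔ (x ∈ P ∧ pvReach P q x) := by
      intro x
      rw [← hF, List.mem_filter]
      simp
    have hm := (hmem m).mp List.mem_cons_self
    refine ⟨m, hm.1, hm.2, ?_⟩
    intro x hx hr
    have hxmem := (hmem x).mpr ⟨hx, hr⟩
    rcases List.mem_cons.mp hxmem with rfl | hxt
    · exact pvRmLe_refl x
    · rw [hF] at hL
      exact pvRmLe_of_lt ((List.pairwise_cons.mp hL).1 x hxt)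

-- "the class of q (within P) touches the new cell p"
def pvTouch (P : List (Int × Int)) (p q : Int × Int) : Prop :=
  ∃ u ∈ P, pvAdj u p ∧ pvReach P q u

lemma pvTouch_iff_min_touched {P : List (Int × Int)} {p q m : Int × Int}
    (hq : q ∈ P) (hm : pvIsMin P q m) :
    pvTouch P p q ↔ (∃ u ∈ P, pvAdj p u ∧ pvIsMin P u m) := by
  constructor
  · rintro ⟨u, hu, hup, hr⟩
    exact ⟨u, hu, pvAdj_symm hup, pvIsMin_transfer hq hr hm⟩
  · rintro ⟨u, hu, hpu, hum⟩
    exact ⟨u, hu, pvAdj_symm hpu,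
      hm.2.1.trans (pvReach_symm hu hum.2.1)⟩

-- untouched classes keep their minimum after adding p
lemma pvIsMin_snoc_untouched {P : List (Int × Int)} {p q m : Int × Int} (hp : p ∉ P)
    (hq : q ∈ P) (hnt : ¬ pvTouch P p q) (hm : pvIsMin P q m) :
    pvIsMin (P ++ [p]) q m := by
  refine ⟨List.mem_append.mpr (Or.inl hm.1),
    pvReach_mono (fun a ha => List.mem_append.mpr (Or.inl ha)) hm.2.1, ?_⟩
  intro x hx hr
  rcases List.mem_append.mp hx with hxP | hxp
  · rw [pvReach_snoc_iff hp hq hxP] at hr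
    rcases hr with h | ⟨u, hu, v, hv, hup, hpv, hqu, hvx⟩
    · exact hm.2.2 x hxP h
    · exact absurd ⟨u, hu, hup, hqu⟩ hnt
  · rw [List.mem_singleton] at hxp
    subst hxp
    rw [pvReach_snoc_p_iff hp hq] at hr
    obtain ⟨u, hu, hup, hqu⟩ := hr
    exact absurd ⟨u, hu, hup, hqu⟩ hnt

-- the minimum of the merged class: conditions on dest
def pvDestOk (P : List (Int × Int)) (p dest : Int × Int) : Prop :=
  dest ∈ P ∧ (∃ u ∈ P, pvAdj p u ∧ pvIsMin P u dest) ∧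
  (∀ x, (∃ u ∈ P, pvAdj p u ∧ pvIsMin P u x) → pvRmLe dest x)

lemma pvIsMin_snoc_p {P : List (Int × Int)} {p dest : Int × Int} (hp : p ∉ P)
    (hPlt : ∀ a ∈ P, pvRmLt a p) (hd : pvDestOk P p dest)
    (hpw : List.Pairwise pvRmLt P) :
    pvIsMin (P ++ [p]) p dest := by
  obtain ⟨hdP, ⟨u0, hu0, hpu0, hu0d⟩, hdle⟩ := hd
  refine ⟨List.mem_append.mpr (Or.inl hdP), ?_, ?_⟩
  · rw [pvReach_snoc_from_p_iff hp hdP]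
    exact ⟨u0, hu0, hpu0, hu0d.2.1⟩
  · intro x hx hr
    rcases List.mem_append.mp hx with hxP | hxp
    · rw [pvReach_snoc_from_p_iff hp hxP] at hr
      obtain ⟨v, hv, hpv, hvx⟩ := hr
      obtain ⟨m, hm⟩ := pvIsMin_exists hpw hv
      refine pvRmLe_trans (hdle m ⟨v, hv, hpv, hm⟩) ?_
      exact (pvIsMin_transfer hv hvx hm).2.2 x (pvReach_mem hv hvx) (pvReach_refl _ _)
    · rw [List.mem_singleton] at hxp
      subst hxp
      exact pvRmLe_of_lt (hPlt dest hdP)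

lemma pvIsMin_snoc_touched {P : List (Int × Int)} {p dest q : Int × Int} (hp : p ∉ P)
    (hPlt : ∀ a ∈ P, pvRmLt a p) (hd : pvDestOk P p dest)
    (hpw : List.Pairwise pvRmLt P) (hq : q ∈ P) (ht : pvTouch P p q) :
    pvIsMin (P ++ [p]) q dest := by
  obtain ⟨u, hu, hup, hqu⟩ := ht
  have hpmin := pvIsMin_snoc_p hp hPlt hd hpw
  have hqp : pvReach (P ++ [p]) q p := by
    rw [pvReach_snoc_p_iff hp hq]
    exact ⟨u, hu, hup, hqu⟩
  refine ⟨hpmin.1, hqp.trans hpmin.2.1, ?_⟩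
  intro x hx hr
  rcases List.mem_append.mp hx with hxP | hxp
  · rw [pvReach_snoc_iff hp hq hxP] at hr
    rcases hr with h | ⟨u', hu', v, hv, hup', hpv, hqu', hvx⟩
    · -- x is in q's old class, whose min is in the touched set
      obtain ⟨m, hm⟩ := pvIsMin_exists hpw hq
      have hmT : ∃ w ∈ P, pvAdj p w ∧ pvIsMin P w m :=
        ((pvTouch_iff_min_touched hq hm).mp ⟨u, hu, hup, hqu⟩)
      exact pvRmLe_trans (hd.2.2 m hmT) (hm.2.2 x hxP h)
    · obtain ⟨m, hm⟩ := pvIsMin_exists hpw hv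
      refine pvRmLe_trans (hd.2.2 m ⟨v, hv, hpv, hm⟩) ?_
      exact (pvIsMin_transfer hv hvx hm).2.2 x (pvReach_mem hv hvx) (pvReach_refl _ _)
  · rw [List.mem_singleton] at hxp
    subst hxp
    exact pvRmLe_of_lt (hPlt dest hd.1)

-- touched membership of the merged class
lemma pvTouch_of_min_touched {P : List (Int × Int)} {p q m : Int × Int}
    (hq : q ∈ P) (hm : pvIsMin P q m) (hmT : ∃ u ∈ P, pvAdj p u ∧ pvIsMin P u m) :
    pvTouch P p q := (pvTouch_iff_min_touched hq hm).mpr hmT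

-- pvMinCell is the lexicographic minimum of a nonempty list
lemma pvFoldMin_spec (t : List (Int × Int)) :
    ∀ a : Int × Int,
      (t.foldl (fun m y => if pvLtB y m then y else m) a) ∈ a :: t ∧
      ∀ x ∈ a :: t, pvRmLe (t.foldl (fun m y => if pvLtB y m then y else m) a) x := by
  induction t with
  | nil =>
    intro a
    refine ⟨List.mem_cons_self, ?_⟩
    intro x hx
    rcases List.mem_cons.mp hx with rfl | h
    · exact pvRmLe_refl x
    · cases h
  | cons b t ih =>
    intro a
    rw [List.foldl_cons]
    by_cases hlt : pvLtB b a = true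
    · rw [if_pos hlt]
      obtain ⟨h1, h2⟩ := ih b
      refine ⟨?_, ?_⟩
      · rcases List.mem_cons.mp h1 with h | h
        · rw [h]; exact List.mem_cons_of_mem _ List.mem_cons_self
        · exact List.mem_cons_of_mem _ (List.mem_cons_of_mem _ h)
      · intro x hx
        rcases List.mem_cons.mp hx with rfl | hx'
        · exact pvRmLe_trans (h2 b List.mem_cons_self)
            (pvRmLe_of_lt ((pvRmLt_iff_ltB b x).mpr hlt))
        · exact h2 x hx'
    · rw [if_neg hlt]
      obtain ⟨h1, h2⟩ := ih a
      refine ⟨?_, ?_⟩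
      · rcases List.mem_cons.mp h1 with h | h
        · rw [h]; exact List.mem_cons_self
        · exact List.mem_cons_of_mem _ (List.mem_cons_of_mem _ h)
      · intro x hx
        rcases List.mem_cons.mp hx with rfl | hx'
        · exact h2 x List.mem_cons_self
        · rcases List.mem_cons.mp hx' with rfl | hx''
          · refine pvRmLe_trans (h2 a List.mem_cons_self) ?_
            rcases pvRmLe_total a x with h | h
            · exact h
            · by_cases hax : a = x
              · exact hax ▸ pvRmLe_refl a
              · exfalso
                exact hlt ((pvRmLt_iff_ltB x a).mp (pvRmLt_of_le_ne h (fun hc => hax hc.symm)))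
          · exact h2 x (List.mem_cons_of_mem _ hx'')

lemma pvMinCell_spec (l : List (Int × Int)) (d : Int × Int) (hne : l ≠ []) :
    pvMinCell l d ∈ l ∧ ∀ x ∈ l, pvRmLe (pvMinCell l d) x := by
  rcases l with _ | ⟨a, t⟩
  · exact absurd rfl hne
  · exact pvFoldMin_spec t a

-- ---------- the union-pass port as a fold over the matching cells ----------
def pvBCell (grid : List (List Int)) (color : Int)
    (st : PySem.Dict (Int × Int) (Int × Int) × PySem.Dict (Int × Int) (List (Int × Int)))
    (p : Int × Int) :
    PySem.Dict (Int × Int) (Int × Int) × PySem.Dict (Int × Int) (List (Int × Int)) :=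
  let seeds : List (Int × Int) :=
    (pvScan4 p.1 p.2).foldl
      (fun sl q => if st.1.contains q then PySem.Set.add sl (st.1.getD q (0, 0)) else sl) []
  if seeds = [] then
    (st.1.insert p p, st.2.insert p [p])
  else
    let dest := pvMinCell seeds (0, 0)
    seeds.foldl (pvAbsorb dest)
      (st.1.insert p dest, st.2.insert dest (PySem.Set.add (st.2.getD dest []) p))

lemma pvBloop_eq (grid : List (List Int)) (color cols : Int)
    (st0 : PySem.Dict (Int × Int) (Int × Int) × PySem.Dict (Int × Int) (List (Int × Int))) :
    (PySem.List.pyRange 0 (grid.length : Int) 1).foldl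
      (fun st r =>
        (PySem.List.pyRange 0 cols 1).foldl (fun st c => pvCellStepB grid color st r c) st) st0 =
      (pvMset grid color cols).foldl (pvBCell grid color) st0 := by
  unfold pvMset
  rw [List.foldl_filter]
  unfold pvRectL
  rw [List.foldl_flatMap]
  congr 1
  funext st r
  rw [List.foldl_map]
  congr 1
  funext st c
  unfold pvCellStepB pvBCell
  split_ifs <;> first | rfl | (exfalso; simp_all)

-- a cell of P is a "local seed" iff none of its four scanned neighbors matches
def pvLocalSeed (M : List (Int × Int)) (s : Int × Int) : Bool :=
  (pvScan4 s.1 s.2).all (fun q => !(decide (q ∈ M)))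

-- the running invariant of the union pass over a processed prefix P
def pvBInv (grid : List (List Int)) (color cols : Int) (P : List (Int × Int))
    (st : PySem.Dict (Int × Int) (Int × Int) × PySem.Dict (Int × Int) (List (Int × Int))) :
    Prop :=
  st.1.keys = P ∧
  (∀ q ∈ P, ∃ m, st.1.get? q = some m ∧ pvIsMin P q m) ∧
  st.2.keys = P.filter (pvLocalSeed (pvMset grid color cols)) ∧
  (∀ s ∈ P, pvIsMin P s s → (st.2.getD s []).Nodup ∧
    ∀ q, q ∈ st.2.getD s [] ↔ (q ∈ P ∧ pvIsMin P q s))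

-- the seeds list collects exactly the minima of the touched classes
lemma pvSeeds_char (P : List (Int × Int)) (owner : PySem.Dict (Int × Int) (Int × Int))
    (h1 : owner.keys = P)
    (h2 : ∀ q ∈ P, ∃ m, owner.get? q = some m ∧ pvIsMin P q m) (cl : List (Int × Int)) :
    ∀ sl0 : List (Int × Int), sl0.Nodup →
      (cl.foldl
        (fun sl q => if owner.contains q then PySem.Set.add sl (owner.getD q (0, 0)) else sl)
        sl0).Nodup ∧
      ∀ x, x ∈ cl.foldl
          (fun sl q => if owner.contains q then PySem.Set.add sl (owner.getD q (0, 0)) else sl)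
          sl0 ↔
        (x ∈ sl0 ∨ ∃ q ∈ cl, q ∈ P ∧ pvIsMin P q x) := by
  induction cl with
  | nil => intro sl0 hnd; exact ⟨hnd, by simp⟩
  | cons q t ih =>
    intro sl0 hnd
    rw [List.foldl_cons]
    by_cases hq : q ∈ P
    · have hcont : owner.contains q = true := by
        rw [PySem.Dict.contains_iff_mem_keys, h1]; exact hq
      obtain ⟨m, hget, hmin⟩ := h2 q hq
      have hgetD : owner.getD q (0, 0) = m := PySem.Dict.getD_of_get?_eq_some owner (0, 0) hget
      rw [if_pos hcont, hgetD]
      obtain ⟨hnd', hmem'⟩ := ih (PySem.Set.add sl0 m) (PySem.Set.nodup_add sl0 m hnd)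
      refine ⟨hnd', fun x => ?_⟩
      rw [hmem' x, PySem.Set.mem_add]
      constructor
      · rintro ((h | rfl) | ⟨q', hq', hq'P, hq'm⟩)
        · exact Or.inl h
        · exact Or.inr ⟨q, List.mem_cons_self, hq, hmin⟩
        · exact Or.inr ⟨q', List.mem_cons_of_mem _ hq', hq'P, hq'm⟩
      · rintro (h | ⟨q', hq', hq'P, hq'm⟩)
        · exact Or.inl (Or.inl h)
        · rcases List.mem_cons.mp hq' with rfl | hq't
          · exact Or.inl (Or.inr (pvIsMin_unique hq'm hmin))
          · exact Or.inr ⟨q', hq't, hq'P, hq'm⟩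
    · have hcont : owner.contains q = false := by
        rw [← Bool.not_eq_true, PySem.Dict.contains_iff_mem_keys, h1]; exact hq
      rw [if_neg (by simp [hcont])]
      obtain ⟨hnd', hmem'⟩ := ih sl0 hnd
      refine ⟨hnd', fun x => ?_⟩
      rw [hmem' x]
      constructor
      · rintro (h | ⟨q', hq', hq'P, hq'm⟩)
        · exact Or.inl h
        · exact Or.inr ⟨q', List.mem_cons_of_mem _ hq', hq'P, hq'm⟩
      · rintro (h | ⟨q', hq', hq'P, hq'm⟩)
        · exact Or.inl h
        · rcases List.mem_cons.mp hq' with rfl | hq't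
          · exact absurd hq'P hq
          · exact Or.inr ⟨q', hq't, hq'P, hq'm⟩

-- the owner re-pointing loop
lemma pvOwnerFold_char (dest : Int × Int) (l : List (Int × Int)) :
    ∀ o : PySem.Dict (Int × Int) (Int × Int), (∀ q ∈ l, o.contains q = true) →
      (l.foldl (fun o q => o.insert q dest) o).keys = o.keys ∧
      (∀ x ∈ l, (l.foldl (fun o q => o.insert q dest) o).get? x = some dest) ∧
      (∀ x, x ∉ l → (l.foldl (fun o q => o.insert q dest) o).get? x = o.get? x) := by
  induction l with
  | nil => intro o _; exact ⟨rfl, by simp, fun x _ => rfl⟩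
  | cons q t ih =>
    intro o hco
    rw [List.foldl_cons]
    have hcont : o.contains q = true := hco q List.mem_cons_self
    obtain ⟨k1, k2, k3⟩ := ih (o.insert q dest) (fun q' hq' => by
      rw [PySem.Dict.contains_insert]
      rw [hco q' (List.mem_cons_of_mem _ hq')]
      simp)
    refine ⟨by rw [k1, PySem.Dict.keys_insert_of_contains o dest hcont], ?_, ?_⟩
    · intro x hx
      rcases List.mem_cons.mp hx with rfl | hxt
      · by_cases hxt2 : x ∈ t
        · exact k2 x hxt2
        · rw [k3 x hxt2, PySem.Dict.get?_insert]
          rw [if_pos rfl]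
      · exact k2 x hxt
    · intro x hx
      have hxq : x ≠ q := fun hc => hx (hc ▸ List.mem_cons_self)
      have hxt : x ∉ t := fun hc => hx (List.mem_cons_of_mem _ hc)
      rw [k3 x hxt, PySem.Dict.get?_insert, if_neg hxq]

-- the absorb loop: re-点 the owners and accumulate the merged member list at dest
lemma pvAbsorb_char (dest : Int × Int) (ts : List (Int × Int)) :
    ∀ (o : PySem.Dict (Int × Int) (Int × Int))
      (cp : PySem.Dict (Int × Int) (List (Int × Int))),
      cp.contains dest = true →
      (cp.getD dest []).Nodup →
      (∀ s ∈ ts, s ≠ dest → ∀ q ∈ cp.getD s [], o.contains q = true) →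
      (ts.foldl (pvAbsorb dest) (o, cp)).1.keys = o.keys ∧
      (∀ x, (∃ s ∈ ts, s ≠ dest ∧ x ∈ cp.getD s []) →
        (ts.foldl (pvAbsorb dest) (o, cp)).1.get? x = some dest) ∧
      (∀ x, ¬(∃ s ∈ ts, s ≠ dest ∧ x ∈ cp.getD s []) →
        (ts.foldl (pvAbsorb dest) (o, cp)).1.get? x = o.get? x) ∧
      (ts.foldl (pvAbsorb dest) (o, cp)).2.keys = cp.keys ∧
      (∀ s', s' ≠ dest → (ts.foldl (pvAbsorb dest) (o, cp)).2.get? s' = cp.get? s') ∧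
      ((ts.foldl (pvAbsorb dest) (o, cp)).2.getD dest []).Nodup ∧
      (∀ x, x ∈ (ts.foldl (pvAbsorb dest) (o, cp)).2.getD dest [] ↔
        (x ∈ cp.getD dest [] ∨ ∃ s ∈ ts, s ≠ dest ∧ x ∈ cp.getD s [])) := by
  induction ts with
  | nil =>
    intro o cp _ hnd _
    refine ⟨rfl, ?_, fun x _ => rfl, rfl, fun s' _ => rfl, hnd, fun x => by simp⟩
    rintro x ⟨s, hs, _⟩
    exact absurd hs (List.not_mem_nil)
  | cons s ts ih =>
    intro o cp hcd hnd hco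
    rw [List.foldl_cons]
    by_cases hsd : s = dest
    · subst hsd
      have hstep : pvAbsorb s (o, cp) s = (o, cp) := by
        unfold pvAbsorb
        rw [if_neg (by simp)]
      rw [hstep]
      obtain ⟨k1, k2, k3, k4, k5, k6, k7⟩ := ih o cp hcd hnd
        (fun s' hs' hne q hq => hco s' (List.mem_cons_of_mem _ hs') hne q hq)
      refine ⟨k1, ?_, ?_, k4, k5, k6, ?_⟩
      · rintro x ⟨s', hs', hne, hx⟩
        rcases List.mem_cons.mp hs' with rfl | hs't
        · exact absurd rfl hne
        · exact k2 x ⟨s', hs't, hne, hx⟩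
      · intro x hx
        refine k3 x (fun ⟨s', hs', hne, hxc⟩ => hx ⟨s', List.mem_cons_of_mem _ hs', hne, hxc⟩)
      · intro x
        rw [k7 x]
        constructor
        · rintro (h | ⟨s', hs', hne, hx⟩)
          · exact Or.inl h
          · exact Or.inr ⟨s', List.mem_cons_of_mem _ hs', hne, hx⟩
        · rintro (h | ⟨s', hs', hne, hx⟩)
          · exact Or.inl h
          · rcases List.mem_cons.mp hs' with rfl | hs't
            · exact absurd rfl hne
            · exact Or.inr ⟨s', hs't, hne, hx⟩
    · set o' := (cp.getD s []).foldl (fun o q => o.insert q dest) o with ho'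
      set cp' := cp.insert dest (PySem.Set.update (cp.getD dest []) (cp.getD s [])) with hcp'
      have hstep : pvAbsorb dest (o, cp) s = (o', cp') := by
        unfold pvAbsorb
        rw [if_pos (by simpa using hsd)]
      rw [hstep]
      obtain ⟨w1, w2, w3⟩ := pvOwnerFold_char dest (cp.getD s []) o
        (fun q hq => hco s List.mem_cons_self hsd q hq)
      have hcd' : cp'.contains dest = true := by
        rw [hcp', PySem.Dict.contains_insert]; simp
      have hgd' : cp'.getD dest [] = PySem.Set.update (cp.getD dest []) (cp.getD s []) := by
        rw [hcp', PySem.Dict.getD_insert, if_pos rfl]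
      have hnd' : (cp'.getD dest []).Nodup := by
        rw [hgd']; exact PySem.Set.nodup_update _ _ hnd
      have hgne : ∀ s', s' ≠ dest → cp'.get? s' = cp.get? s' := by
        intro s' hne
        rw [hcp', PySem.Dict.get?_insert, if_neg hne]
      have hgDne : ∀ s', s' ≠ dest → cp'.getD s' [] = cp.getD s' [] := by
        intro s' hne
        rw [PySem.Dict.getD_eq_get?_getD, hgne s' hne, ← PySem.Dict.getD_eq_get?_getD]
      obtain ⟨k1, k2, k3, k4, k5, k6, k7⟩ := ih o' cp' hcd' hnd'
        (fun s' hs' hne q hq => by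
          rw [hgDne s' hne] at hq
          have h := hco s' (List.mem_cons_of_mem _ hs') hne q hq
          rw [PySem.Dict.contains_iff_mem_keys] at h ⊢
          rw [w1]
          exact h)
      have htr : ∀ x, (∃ s' ∈ ts, s' ≠ dest ∧ x ∈ cp'.getD s' []) ↔
          (∃ s' ∈ ts, s' ≠ dest ∧ x ∈ cp.getD s' []) := by
        intro x
        constructor
        · rintro ⟨s', hs', hne, hx⟩
          rw [hgDne s' hne] at hx
          exact ⟨s', hs', hne, hx⟩
        · rintro ⟨s', hs', hne, hx⟩
          rw [← hgDne s' hne] at hx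
          exact ⟨s', hs', hne, hx⟩
      refine ⟨by rw [k1, w1], ?_, ?_, ?_, ?_, k6, ?_⟩
      · rintro x ⟨s', hs', hne, hx⟩
        rcases List.mem_cons.mp hs' with rfl | hs't
        · by_cases hrest : ∃ s'' ∈ ts, s'' ≠ dest ∧ x ∈ cp'.getD s'' []
          · exact k2 x hrest
          · rw [k3 x hrest]
            exact w2 x hx
        · exact k2 x ((htr x).mpr ⟨s', hs't, hne, hx⟩)
      · intro x hx
        have hxs : x ∉ cp.getD s [] := fun hc => hx ⟨s, List.mem_cons_self, hsd, hc⟩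
        rw [k3 x (fun hc => hx (by
          obtain ⟨s', hs', hne, hxc⟩ := (htr x).mp hc
          exact ⟨s', List.mem_cons_of_mem _ hs', hne, hxc⟩))]
        exact w3 x hxs
      · rw [k4, hcp', PySem.Dict.keys_insert_of_contains cp _ hcd]
      · intro s' hne
        rw [k5 s' hne, hgne s' hne]
      · intro x
        rw [k7 x, hgd', PySem.Set.mem_update]
        constructor
        · rintro ((h | h) | h)
          · exact Or.inl h
          · exact Or.inr ⟨s, List.mem_cons_self, hsd, h⟩
          · obtain ⟨s', hs', hne, hx⟩ := (htr x).mp h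
            exact Or.inr ⟨s', List.mem_cons_of_mem _ hs', hne, hx⟩
        · rintro (h | ⟨s', hs', hne, hx⟩)
          · exact Or.inl (Or.inl h)
          · rcases List.mem_cons.mp hs' with rfl | hs't
            · exact Or.inl (Or.inr hx)
            · exact Or.inr ((htr x).mpr ⟨s', hs't, hne, hx⟩)

lemma pvRmLt_trans {a b c : Int × Int} : pvRmLt a b → pvRmLt b c → pvRmLt a c := by
  simp only [pvRmLt]; omega

-- a live class minimum has no already-scanned matching neighbor
lemma pvLive_ls {P M : List (Int × Int)} (hPM : ∀ a ∈ P, a ∈ M)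
    (hdc : ∀ q ∈ M, ∀ s ∈ P, pvRmLt q s → q ∈ P) {s : Int × Int} (hs : s ∈ P)
    (hlive : pvIsMin P s s) : pvLocalSeed M s = true := by
  simp only [pvLocalSeed, List.all_eq_true, Bool.not_eq_true', decide_eq_false_iff_not]
  intro q hq hqM
  obtain ⟨hadj, hlt⟩ := (pvMem_scan4 s q).mp hq
  have hqP : q ∈ P := hdc q hqM s hs hlt
  have : pvRmLe s q := hlive.2.2 q hqP (pvReach_single hqP hadj)
  exact pvRmLt_not_le hlt this

lemma pvIsMin_self_iff_seed {M : List (Int × Int)} {s : Int × Int} (hs : s ∈ M) :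
    pvIsMin M s s ↔ pvIsSeed M s := by
  constructor
  · intro h q hq hr
    exact h.2.2 q hq hr
  · intro h
    exact ⟨hs, pvReach_refl M s, fun x hx hr => h x hx hr⟩

-- the induction step of the union pass
lemma pvBCell_inv (grid : List (List Int)) (color cols : Int)
    (P R : List (Int × Int)) (p : Int × Int)
    (hsplit : pvMset grid color cols = P ++ p :: R)
    (st : PySem.Dict (Int × Int) (Int × Int) × PySem.Dict (Int × Int) (List (Int × Int)))
    (hinv : pvBInv grid color cols P st) :
    pvBInv grid color cols (P ++ [p]) (pvBCell grid color st p) := by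
  have hMpw := pvMset_pairwise grid color cols
  have hMnd := pvMset_nodup grid color cols
  have hpM : p ∈ pvMset grid color cols := by rw [hsplit]; simp
  have hPM : ∀ a ∈ P, a ∈ pvMset grid color cols := by
    intro a ha; rw [hsplit]; exact List.mem_append.mpr (Or.inl ha)
  have hpP : p ∉ P := by
    rw [hsplit] at hMnd
    have := List.disjoint_of_nodup_append hMnd
    exact fun hp => this hp List.mem_cons_self
  have hPlt : ∀ a ∈ P, pvRmLt a p := by
    intro a ha
    rw [hsplit] at hMpw
    exact (List.pairwise_append.mp hMpw).2.2 a ha p List.mem_cons_self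
  have hPpw : List.Pairwise pvRmLt P := by
    rw [hsplit] at hMpw
    exact (List.pairwise_append.mp hMpw).1
  have hdc : ∀ q ∈ pvMset grid color cols, pvRmLt q p → q ∈ P := by
    intro q hq hlt
    have hq' : q ∈ P ++ p :: R := hsplit ▸ hq
    rcases List.mem_append.mp hq' with h | h
    · exact h
    · rcases List.mem_cons.mp h with rfl | h'
      · exact absurd rfl (pvRmLt_ne hlt)
      · exfalso
        rw [hsplit] at hMpw
        have := (List.pairwise_append.mp hMpw).2.1
        exact pvRmLt_ne (pvRmLt_trans ((List.pairwise_cons.mp this).1 q h') hlt) rfl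
  have hdcP : ∀ q ∈ pvMset grid color cols, ∀ s ∈ P, pvRmLt q s → q ∈ P := by
    intro q hq s hsP hlt
    exact hdc q hq (pvRmLt_trans hlt (hPlt s hsP))
  obtain ⟨i1, i2, i3, i4⟩ := hinv
  have hscan : ∀ x, (∃ q ∈ pvScan4 p.1 p.2, q ∈ P ∧ pvIsMin P q x) ↔
      (∃ q ∈ P, pvAdj p q ∧ pvIsMin P q x) := by
    intro x
    constructor
    · rintro ⟨q, hq, hqP, hqm⟩
      exact ⟨q, hqP, ((pvMem_scan4 p q).mp hq).1, hqm⟩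
    · rintro ⟨q, hqP, hadj, hqm⟩
      exact ⟨q, (pvMem_scan4 p q).mpr ⟨hadj, hPlt q hqP⟩, hqP, hqm⟩
  unfold pvBCell
  dsimp only
  set seeds := (pvScan4 p.1 p.2).foldl
    (fun sl q => if st.1.contains q then PySem.Set.add sl (st.1.getD q (0, 0)) else sl) []
    with hseedsdef
  obtain ⟨hsnd, hsmem0⟩ := pvSeeds_char P st.1 i1 i2 (pvScan4 p.1 p.2) [] List.nodup_nil
  have hsmem : ∀ x, x ∈ seeds ↔ ∃ q ∈ P, pvAdj p q ∧ pvIsMin P q x := by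
    intro x
    rw [hseedsdef]
    rw [hsmem0 x]
    simp only [List.not_mem_nil, false_or]
    exact hscan x
  by_cases hseeds : seeds = []
  · -- no scanned matching neighbor: p forms its own class
    rw [if_pos hseeds]
    have hnonbr : ∀ q ∈ P, ¬pvAdj p q := by
      intro q hq hadj
      obtain ⟨m, hm⟩ := pvIsMin_exists hPpw hq
      have : m ∈ seeds := (hsmem m).mpr ⟨q, hq, hadj, hm⟩
      rw [hseeds] at this
      exact absurd this List.not_mem_nil
    have hnt : ∀ q, ¬pvTouch P p q := by
      rintro q ⟨u, hu, hup, _⟩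
      exact hnonbr u hu (pvAdj_symm hup)
    have hppmin : pvIsMin (P ++ [p]) p p := by
      refine ⟨List.mem_append.mpr (Or.inr (List.mem_singleton_self _)), pvReach_refl _ p, ?_⟩
      intro x hx hr
      rcases List.mem_append.mp hx with hxP | hxp
      · rw [pvReach_snoc_from_p_iff hpP hxP] at hr
        obtain ⟨v, hv, hpv, _⟩ := hr
        exact absurd hpv (hnonbr v hv)
      · rw [List.mem_singleton] at hxp
        subst hxp
        exact pvRmLe_refl x
    have hlsp : pvLocalSeed (pvMset grid color cols) p = true := by
      simp only [pvLocalSeed, List.all_eq_true, Bool.not_eq_true', decide_eq_false_iff_not]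
      intro q hq hqM
      obtain ⟨hadj, hlt⟩ := (pvMem_scan4 p q).mp hq
      exact hnonbr q (hdc q hqM hlt) hadj
    have hcontp : st.1.contains p = false := by
      rw [← Bool.not_eq_true, PySem.Dict.contains_iff_mem_keys, i1]
      exact hpP
    have hcontp2 : st.2.contains p = false := by
      rw [← Bool.not_eq_true, PySem.Dict.contains_iff_mem_keys, i3]
      intro hmem
      exact hpP (List.mem_filter.mp hmem).1
    refine ⟨?_, ?_, ?_, ?_⟩
    · rw [PySem.Dict.keys_insert_of_not_contains st.1 p hcontp, i1]
    · intro q hq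
      rcases List.mem_append.mp hq with hqP | hqp
      · obtain ⟨m, hget, hmin⟩ := i2 q hqP
        refine ⟨m, ?_, pvIsMin_snoc_untouched hpP hqP (hnt q) hmin⟩
        rw [PySem.Dict.get?_insert, if_neg (fun hc : q = p => hpP (hc ▸ hqP)), hget]
      · rw [List.mem_singleton] at hqp
        subst hqp
        refine ⟨q, ?_, hppmin⟩
        rw [PySem.Dict.get?_insert, if_pos rfl]
    · rw [PySem.Dict.keys_insert_of_not_contains st.2 [p] hcontp2, i3,
        List.filter_append]
      congr 1
      simp only [List.filter_cons, List.filter_nil]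
      rw [if_pos hlsp]
    · intro s hs hlive
      rcases List.mem_append.mp hs with hsP | hsp
      · have hsnep : s ≠ p := fun hc => hpP (hc ▸ hsP)
        have hgval : (st.2.insert p [p]).getD s [] = st.2.getD s [] := by
          rw [PySem.Dict.getD_insert, if_neg hsnep]
        have hliveP : pvIsMin P s s := by
          obtain ⟨m, hm⟩ := pvIsMin_exists hPpw hsP
          have := pvIsMin_snoc_untouched hpP hsP (hnt s) hm
          have heq := pvIsMin_unique hlive this
          exact heq ▸ hm
        obtain ⟨hnd, hmem⟩ := i4 s hsP hliveP
        rw [hgval]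
        refine ⟨hnd, fun q => ?_⟩
        rw [hmem q]
        constructor
        · rintro ⟨hqP, hqmin⟩
          exact ⟨List.mem_append.mpr (Or.inl hqP),
            pvIsMin_snoc_untouched hpP hqP (hnt q) hqmin⟩
        · rintro ⟨hq', hqmin⟩
          rcases List.mem_append.mp hq' with hqP | hqp
          · obtain ⟨m, hm⟩ := pvIsMin_exists hPpw hqP
            have hm' := pvIsMin_snoc_untouched hpP hqP (hnt q) hm
            have : s = m := pvIsMin_unique hqmin hm'
            exact ⟨hqP, this ▸ hm⟩
          · rw [List.mem_singleton] at hqp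
            subst hqp
            exact absurd (pvIsMin_unique hqmin hppmin) hsnep
      · rw [List.mem_singleton] at hsp
        subst hsp
        have hgval : (st.2.insert s [s]).getD s [] = [s] := by
          rw [PySem.Dict.getD_insert, if_pos rfl]
        rw [hgval]
        refine ⟨List.nodup_singleton s, fun q => ?_⟩
        rw [List.mem_singleton]
        constructor
        · rintro rfl
          exact ⟨List.mem_append.mpr (Or.inr (List.mem_singleton_self _)), hppmin⟩
        · rintro ⟨hq', hqmin⟩
          rcases List.mem_append.mp hq' with hqP | hqp
          · obtain ⟨m, hm⟩ := pvIsMin_exists hPpw hqP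
            have hm' := pvIsMin_snoc_untouched hpP hqP (hnt q) hm
            have : s = m := pvIsMin_unique hqmin hm'
            exact absurd (this ▸ hm.1 : s ∈ P) hpP
          · exact List.mem_singleton.mp hqp
  · -- p touches at least one existing class: merge them under dest
    rw [if_neg hseeds]
    obtain ⟨hdmem, hdle⟩ := pvMinCell_spec seeds (0, 0) hseeds
    set dest := pvMinCell seeds (0, 0) with hdestdef
    obtain ⟨q0, hq0P, hq0adj, hq0min⟩ := (hsmem dest).mp hdmem
    have hdP : dest ∈ P := hq0min.1
    have hdOk : pvDestOk P p dest :=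
      ⟨hdP, ⟨q0, hq0P, hq0adj, hq0min⟩, fun x hx => hdle x ((hsmem x).mpr hx)⟩
    have hdlive : pvIsMin P dest dest := pvIsMin_self hq0P hq0min
    have hdls : pvLocalSeed (pvMset grid color cols) dest = true :=
      pvLive_ls hPM hdcP hdP hdlive
    have hdk : st.2.contains dest = true := by
      rw [PySem.Dict.contains_iff_mem_keys, i3, List.mem_filter]
      exact ⟨hdP, hdls⟩
    have hlsp : pvLocalSeed (pvMset grid color cols) p = false := by
      rw [← Bool.not_eq_true]
      simp only [pvLocalSeed, List.all_eq_true, Bool.not_eq_true', decide_eq_false_iff_not]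
      push_neg
      exact ⟨q0, (pvMem_scan4 p q0).mpr ⟨hq0adj, hPlt q0 hq0P⟩, hPM q0 hq0P⟩
    have hcontp : st.1.contains p = false := by
      rw [← Bool.not_eq_true, PySem.Dict.contains_iff_mem_keys, i1]
      exact hpP
    obtain ⟨hDnd, hDmem⟩ := i4 dest hdP hdlive
    set o1 := st.1.insert p dest with ho1
    set cp1 := st.2.insert dest (PySem.Set.add (st.2.getD dest []) p) with hcp1
    have hcd1 : cp1.contains dest = true := by
      rw [hcp1, PySem.Dict.contains_insert]; simp
    have hg1d : cp1.getD dest [] = PySem.Set.add (st.2.getD dest []) p := by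
      rw [hcp1, PySem.Dict.getD_insert, if_pos rfl]
    have hgne1 : ∀ s', s' ≠ dest → cp1.getD s' [] = st.2.getD s' [] := by
      intro s' hne
      rw [hcp1, PySem.Dict.getD_insert, if_neg hne]
    have hseedlive : ∀ s ∈ seeds, s ∈ P ∧ pvIsMin P s s := by
      intro s hs
      obtain ⟨q, hq, hadj, hqm⟩ := (hsmem s).mp hs
      exact ⟨hqm.1, pvIsMin_self hq hqm⟩
    have hdestTouch : ∀ x ∈ P, pvIsMin P x dest → pvTouch P p x :=
      fun x hx hxm => pvTouch_of_min_touched hx hxm ⟨q0, hq0P, hq0adj, hq0min⟩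
    obtain ⟨k1, k2, k3, k4, k5, k6, k7⟩ := pvAbsorb_char dest seeds o1 cp1 hcd1
      (by rw [hg1d]; exact PySem.Set.nodup_add _ _ hDnd)
      (by
        intro s hs hne q hq
        rw [hgne1 s hne] at hq
        obtain ⟨hsP, hslive⟩ := hseedlive s hs
        have hqP : q ∈ P := ((i4 s hsP hslive).2 q |>.mp hq).1
        rw [ho1, PySem.Dict.contains_insert]
        have : st.1.contains q = true := by
          rw [PySem.Dict.contains_iff_mem_keys, i1]; exact hqP
        rw [this]
        simp)
    have habs : ∀ x, (∃ s ∈ seeds, s ≠ dest ∧ x ∈ cp1.getD s []) ↔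
        (x ∈ P ∧ pvTouch P p x ∧ ¬ pvIsMin P x dest) := by
      intro x
      constructor
      · rintro ⟨s, hs, hne, hx⟩
        rw [hgne1 s hne] at hx
        obtain ⟨hsP, hslive⟩ := hseedlive s hs
        obtain ⟨hxP, hxm⟩ := ((i4 s hsP hslive).2 x).mp hx
        obtain ⟨q, hq, hadj, hqm⟩ := (hsmem s).mp hs
        refine ⟨hxP, pvTouch_of_min_touched hxP hxm ⟨q, hq, hadj, hqm⟩, ?_⟩
        intro hxd
        exact hne (pvIsMin_unique hxm hxd)
      · rintro ⟨hxP, htch, hnd⟩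
        obtain ⟨m, hm⟩ := pvIsMin_exists hPpw hxP
        have hmseeds : m ∈ seeds :=
          (hsmem m).mpr ((pvTouch_iff_min_touched hxP hm).mp htch)
        have hmd : m ≠ dest := fun hc => hnd (hc ▸ hm)
        obtain ⟨hmP, hmlive⟩ := hseedlive m hmseeds
        refine ⟨m, hmseeds, hmd, ?_⟩
        rw [hgne1 m hmd]
        exact ((i4 m hmP hmlive).2 x).mpr ⟨hxP, hm⟩
    have hppd : pvIsMin (P ++ [p]) p dest := pvIsMin_snoc_p hpP hPlt hdOk hPpw
    have hTch_min_dest : ∀ x ∈ P, pvTouch P p x → pvIsMin (P ++ [p]) x dest :=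
      fun x hx ht => pvIsMin_snoc_touched hpP hPlt hdOk hPpw hx ht
    refine ⟨?_, ?_, ?_, ?_⟩
    · rw [k1, ho1, PySem.Dict.keys_insert_of_not_contains st.1 dest hcontp, i1]
    · intro q hq
      rcases List.mem_append.mp hq with hqP | hqp
      · have hqnep : q ≠ p := fun hc => hpP (hc ▸ hqP)
        by_cases htch : pvTouch P p q
        · refine ⟨dest, ?_, hTch_min_dest q hqP htch⟩
          by_cases habsq : ∃ s ∈ seeds, s ≠ dest ∧ q ∈ cp1.getD s []
          · exact k2 q habsq
          · have hqd : pvIsMin P q dest := by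
              by_contra hc
              exact habsq ((habs q).mpr ⟨hqP, htch, hc⟩)
            rw [k3 q habsq, ho1, PySem.Dict.get?_insert, if_neg hqnep]
            obtain ⟨m, hget, hmin⟩ := i2 q hqP
            rw [hget, pvIsMin_unique hmin hqd]
        · obtain ⟨m, hget, hmin⟩ := i2 q hqP
          refine ⟨m, ?_, pvIsMin_snoc_untouched hpP hqP htch hmin⟩
          rw [k3 q (fun hc => htch ((habs q).mp hc).2.1), ho1,
            PySem.Dict.get?_insert, if_neg hqnep, hget]
      · rw [List.mem_singleton] at hqp
        subst hqp
        refine ⟨dest, ?_, hppd⟩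
        rw [k3 q ?_, ho1, PySem.Dict.get?_insert, if_pos rfl]
        rintro ⟨s, hs, hne, hx⟩
        rw [hgne1 s hne] at hx
        obtain ⟨hsP, hslive⟩ := hseedlive s hs
        exact hpP (((i4 s hsP hslive).2 q).mp hx).1
    · rw [k4, hcp1, PySem.Dict.keys_insert_of_contains st.2 _ hdk, i3, List.filter_append]
      simp only [List.filter_cons, List.filter_nil]
      rw [hlsp]
      simp
    · intro s hs hlive'
      have hsnep : s ≠ p := by
        rintro rfl
        exact hpP ((pvIsMin_unique hlive' hppd) ▸ hdP)
      have hsP : s ∈ P := by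
        rcases List.mem_append.mp hs with h | h
        · exact h
        · rw [List.mem_singleton] at h
          exact absurd h hsnep
      by_cases hsd : s = dest
      · subst hsd
        refine ⟨k6, fun x => ?_⟩
        rw [k7 x, hg1d, PySem.Set.mem_add, habs x]
        constructor
        · rintro ((hx | rfl) | ⟨hxP, htch, _⟩)
          · obtain ⟨hxP, hxm⟩ := (hDmem x).mp hx
            exact ⟨List.mem_append.mpr (Or.inl hxP),
              hTch_min_dest x hxP (hdestTouch x hxP hxm)⟩
          · exact ⟨List.mem_append.mpr (Or.inr (List.mem_singleton_self _)), hppd⟩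
          · exact ⟨List.mem_append.mpr (Or.inl hxP), hTch_min_dest x hxP htch⟩
        · rintro ⟨hx', hxm'⟩
          rcases List.mem_append.mp hx' with hxP | hxp
          · have htch : pvTouch P p x := by
              by_contra hc
              obtain ⟨m, hm⟩ := pvIsMin_exists hPpw hxP
              have := pvIsMin_snoc_untouched hpP hxP hc hm
              have hmd : dest = m := pvIsMin_unique hxm' this
              exact hc (hdestTouch x hxP (hmd ▸ hm))
            obtain ⟨m, hm⟩ := pvIsMin_exists hPpw hxP
            by_cases hmd : m = dest
            · exact Or.inl (Or.inl ((hDmem x).mpr ⟨hxP, hmd ▸ hm⟩))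
            · exact Or.inr ⟨hxP, htch, fun hc => hmd (pvIsMin_unique hm hc)⟩
          · rw [List.mem_singleton] at hxp
            exact Or.inl (Or.inr hxp)
      · have hntch : ¬ pvTouch P p s := by
          intro htch
          exact hsd (pvIsMin_unique hlive' (hTch_min_dest s hsP htch))
        have hliveP : pvIsMin P s s := by
          obtain ⟨m, hm⟩ := pvIsMin_exists hPpw hsP
          have := pvIsMin_snoc_untouched hpP hsP hntch hm
          exact (pvIsMin_unique hlive' this) ▸ hm
        have hgval : (seeds.foldl (pvAbsorb dest) (o1, cp1)).2.getD s [] = st.2.getD s [] := by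
          rw [PySem.Dict.getD_eq_get?_getD, k5 s hsd, hcp1, PySem.Dict.get?_insert,
            if_neg hsd, ← PySem.Dict.getD_eq_get?_getD]
        obtain ⟨hnd, hmem⟩ := i4 s hsP hliveP
        rw [hgval]
        refine ⟨hnd, fun q => ?_⟩
        rw [hmem q]
        constructor
        · rintro ⟨hqP, hqm⟩
          have hqntch : ¬ pvTouch P p q := by
            intro htch
            exact hntch ((pvTouch_iff_min_touched hsP hliveP).mpr
              ((pvTouch_iff_min_touched hqP hqm).mp htch))
          exact ⟨List.mem_append.mpr (Or.inl hqP),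
            pvIsMin_snoc_untouched hpP hqP hqntch hqm⟩
        · rintro ⟨hq', hqm'⟩
          rcases List.mem_append.mp hq' with hqP | hqp
          · by_cases htch : pvTouch P p q
            · exact absurd (pvIsMin_unique hqm' (hTch_min_dest q hqP htch)) hsd
            · obtain ⟨m, hm⟩ := pvIsMin_exists hPpw hqP
              have := pvIsMin_snoc_untouched hpP hqP htch hm
              exact ⟨hqP, (pvIsMin_unique hqm' this) ▸ hm⟩
          · rw [List.mem_singleton] at hqp
            subst hqp
            exact absurd (pvIsMin_unique hqm' hppd) hsd

lemma pvB_fold_inv (grid : List (List Int)) (color cols : Int) :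
    ∀ (R P : List (Int × Int))
      (st : PySem.Dict (Int × Int) (Int × Int) × PySem.Dict (Int × Int) (List (Int × Int))),
      pvMset grid color cols = P ++ R →
      pvBInv grid color cols P st →
      pvBInv grid color cols (pvMset grid color cols)
        (R.foldl (pvBCell grid color) st) := by
  intro R
  induction R with
  | nil =>
    intro P st hsplit hinv
    rw [List.foldl_nil]
    rw [List.append_nil] at hsplit
    rw [hsplit]
    exact hinv
  | cons p R' ih =>
    intro P st hsplit hinv
    rw [List.foldl_cons]
    refine ih (P ++ [p]) _ (by rw [hsplit, List.append_assoc]; rfl) ?_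
    exact pvBCell_inv grid color cols P R' p hsplit st hinv

lemma pvB_eq_canon (grid : List (List Int)) (color : Int) :
    find_connected_all_directions_by_color_alt grid color =
      pvCanon (pvMset grid color
        (if (grid.length : Int) > 0 then ((PySem.List.pyGetD grid 0 []).length : Int) else 0)) := by
  unfold find_connected_all_directions_by_color_alt
  dsimp only
  rw [pvBloop_eq]
  set cols : Int := if (grid.length : Int) > 0 then ((PySem.List.pyGetD grid 0 []).length : Int) else 0 with hcols
  set M := pvMset grid color cols with hM
  obtain ⟨i1, i2, i3, i4⟩ := pvB_fold_inv grid color cols M [] (PySem.Dict.empty, PySem.Dict.empty)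
    (by simp [hM])
    ⟨by simp [PySem.Dict.keys_empty], by simp, by simp [PySem.Dict.keys_empty], by simp⟩
  have hMpw : List.Pairwise pvRmLt M := pvMset_pairwise grid color cols
  rw [i3]
  unfold pvCanon
  rw [List.filter_filter]
  have hfe : M.filter (fun a => (((M.foldl (pvBCell grid color)
        (PySem.Dict.empty, PySem.Dict.empty)).1.getD a (0, 0) == a)) &&
        pvLocalSeed (pvMset grid color cols) a)
      = M.filter (fun s => @decide _ (Classical.propDecidable (pvIsSeed M s))) := by
    apply List.filter_congr
    intro s hsM
    obtain ⟨m, hget, hmin⟩ := i2 s hsM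
    have hgD : (M.foldl (pvBCell grid color) (PySem.Dict.empty, PySem.Dict.empty)).1.getD s (0, 0) = m :=
      PySem.Dict.getD_of_get?_eq_some _ _ hget
    rw [hgD]
    by_cases hseed : pvIsSeed M s
    · have hlive : pvIsMin M s s := (pvIsMin_self_iff_seed hsM).mpr hseed
      have hms : m = s := pvIsMin_unique hmin hlive
      rw [hms]
      simp only [BEq.rfl, Bool.true_and]
      rw [pvLive_ls (fun a ha => ha) (fun q hq _ _ _ => hq) hsM hlive]
      simp [hseed]
    · have hms : m ≠ s := fun hc => hseed ((pvIsMin_self_iff_seed hsM).mp (hc ▸ hmin))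
      have h1 : (m == s) = false := by simpa using hms
      rw [h1]
      simp [hseed]
  rw [hfe]
  apply List.map_congr_left
  intro s hs
  rw [List.mem_filter] at hs
  obtain ⟨hsM, hseedD⟩ := hs
  have hseed : pvIsSeed M s := by revert hseedD; simp
  have hlive : pvIsMin M s s := (pvIsMin_self_iff_seed hsM).mpr hseed
  obtain ⟨hnd, hmem⟩ := i4 s hsM hlive
  refine pvSort_eq hnd (pvClassL_pairwise hMpw s) (fun x => ?_)
  rw [hmem x, pvMem_classL]
  constructor
  · rintro ⟨hxM, hxmin⟩
    exact ⟨hxM, pvReach_symm hxM hxmin.2.1⟩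
  · rintro ⟨hxM, hr⟩
    exact ⟨hxM, hsM, pvReach_symm hsM hr, fun y hy hry => hseed y hy (hr.trans hry)⟩

theorem pvMainEq (grid : List (List Int)) (color : Int)
    (_hpre : Pre_find_connected_all_directions_by_color grid color) :
    find_connected_all_directions_by_color grid color =
      find_connected_all_directions_by_color_alt grid color := by
  rw [pvA_eq_front grid color, pvFront_eq_canon, pvB_eq_canon]

-- ===== VERDICT (by name: the statement is the Claim_ definition above) =====
theorem find_connected_all_directions_by_color_spec : Claim_equal_find_connected_all_directions_by_color := by
  intro grid color _hdom hpre
  unfold Spec_find_connected_all_directions_by_color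
  exact pvMainEq grid color hpre
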